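-- pv_equiv track=rewrite | github.com/emino39/Algorithm | programmers/154540.py | solution
-- ===== SOURCE A (Python) =====
-- from collections import deque
--
-- def solution(maps):
--     answer = []
--     dx = [-1, 1, 0, 0]
--     dy = [0, 0, 1, -1]
--
--     W = len(maps[0])
--     H = len(maps)
--     visited = [[0] * W for _ in range(H)]
--
--     queue = deque()
--
--     for h in range(H):
--         for w in range(W):
--             total = 0
--             if maps[h][w] != 'X' and not visited[h][w]:
--                 total += int(maps[h][w])
--                 queue.append([h, w])
--                 visited[h][w] = 1
--
--             while queue:
--                 x, y = queue.popleft()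
--
--                 for i in range(4):
--                     nx = x + dx[i]
--                     ny = y + dy[i]
--
--                     if 0 <= nx < H and 0 <= ny < W:
--                         if maps[nx][ny] != 'X' and not visited[nx][ny]:
--                             total += int(maps[nx][ny])
--                             queue.append([nx, ny])
--                             visited[nx][ny] = 1
--
--             if total != 0:
--                 answer.append(total)
--                 total = 0
--
--     if answer == []:
--         return [-1]
--     else:
--         answer = sorted(answer, reverse=False)
--
--     return answer
-- ===== SOURCE B (Python) =====
-- def solution(maps):
--     H, W = len(maps), len(maps[0])
--     cells = [(h, w) for h in range(H) for w in range(W) if maps[h][w] != 'X']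
--     # union-find: parent pointers always point to a lex-smaller cell, so the
--     # root of each set is the lexicographically smallest cell of the set
--     parent = {c: c for c in cells}
--
--     def find(c):
--         while parent[c] != c:
--             c = parent[c]
--         return c
--
--     for (h, w) in cells:
--         for n in ((h, w + 1), (h + 1, w)):
--             if n in parent:
--                 ra, rb = find((h, w)), find(n)
--                 if ra != rb:
--                     parent[max(ra, rb)] = min(ra, rb)
--
--     sums = {}
--     for c in cells:
--         r = find(c)
--         sums[r] = sums.get(r, 0) + int(maps[c[0]][c[1]])
--
--     totals = [t for t in sums.values() if t != 0]
--     return sorted(totals) if totals else [-1]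
-- ===== Notes on version B (the rewrite author's own statement) =====
-- stated objective: alternative
-- what changed: Replaces the interleaved BFS flood fill (deque, 2D visited matrix, per-seed queue drain) with a three-phase union-find: build a DSU over the non-'X' cells by uniting each cell with its right and down neighbours (parent pointers always aimed at the lex-smaller root, so each set's root is its first cell in scan order), then aggregate int(cell) per root into a dict, then filter zero totals and sort ascending ([-1] if empty).
import Mathlib
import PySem

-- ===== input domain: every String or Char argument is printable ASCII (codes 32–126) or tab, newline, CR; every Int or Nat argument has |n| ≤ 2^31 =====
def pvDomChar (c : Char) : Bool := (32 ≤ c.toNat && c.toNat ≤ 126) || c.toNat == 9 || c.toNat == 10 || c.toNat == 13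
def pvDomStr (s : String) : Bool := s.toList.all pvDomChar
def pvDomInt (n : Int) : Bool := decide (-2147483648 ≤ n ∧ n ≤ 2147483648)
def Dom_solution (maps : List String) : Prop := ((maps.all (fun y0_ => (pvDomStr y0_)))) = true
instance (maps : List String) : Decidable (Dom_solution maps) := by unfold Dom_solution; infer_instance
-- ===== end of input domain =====

-- B replaces A's interleaved BFS flood fill (deque + 2D visited matrix + dx/dy arrays) by a
-- three-phase union-find over the non-'X' cells (unite right/down neighbours, aggregate per root,
-- filter and sort); same return value on Pre_.

-- ===== PORT A =====

-- maps[i][j] (both indices guarded non-negative and in range at every use inside Pre_)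
def aCharAt (maps : List String) (i j : Int) : Char :=
  ((PySem.List.pyGet? maps i).bind (fun s => PySem.Str.pyGet? s j)).getD 'X'

-- int(maps[i][j]); Pre_ excludes the ValueError (non-digit) case, so .getD 0 is never taken
def aVal (maps : List String) (i j : Int) : Int :=
  (PySem.Int.ofChars? [aCharAt maps i j]).getD 0

-- visited[i][j]; out-of-grid default 1 is unreachable in Python (the grid is always H×W and uses are guarded)
def aGet2 (g : List (List Int)) (i j : Int) : Int :=
  ((PySem.List.pyGet? g i).bind (fun r => PySem.List.pyGet? r j)).getD 1

-- visited[i][j] = x (indices are non-negative and in range at every use)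
def aSet2 (g : List (List Int)) (i j : Int) (x : Int) : List (List Int) :=
  if 0 ≤ i ∧ 0 ≤ j then g.modify i.toNat (fun r => r.modify j.toNat (fun _ => x)) else g

-- zero-entry count: termination measure fuel for the while-loop (not part of the computation)
def aZeros (g : List (List Int)) : Nat := (g.map (fun r => r.count 0)).sum

-- body of 'for i in range(4)': nx,ny from dx/dy, bounds test, mark+count+enqueue
def aExpand (maps : List String) (H W x y : Int)
    (st : List (List Int) × List (Int × Int) × Int) (i : Int) :
    List (List Int) × List (Int × Int) × Int :=
  let nx := x + PySem.List.pyGetD [(-1 : Int), 1, 0, 0] i 0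
  let ny := y + PySem.List.pyGetD [(0 : Int), 0, 1, -1] i 0
  if (0 ≤ nx ∧ nx < H) ∧ (0 ≤ ny ∧ ny < W) then
    if aCharAt maps nx ny ≠ 'X' ∧ aGet2 st.1 nx ny = 0 then
      (aSet2 st.1 nx ny 1, st.2.1 ++ [(nx, ny)], st.2.2 + aVal maps nx ny)
    else st
  else st


theorem aZeros_row (r : List Int) (j : Nat) (h : r[j]? = some 0) :
    (r.modify j (fun _ => 1)).count 0 + 1 = r.count 0 := by
  induction r generalizing j with
  | nil => simp at h
  | cons a t ih =>
    cases j with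
    | zero =>
      simp only [List.getElem?_cons_zero, Option.some.injEq] at h
      subst h
      simp [List.modify]
    | succ n =>
      simp only [List.getElem?_cons_succ] at h
      have he : (a :: t).modify (n + 1) (fun _ => (1 : Int)) = a :: t.modify n (fun _ => 1) := rfl
      rw [he]
      simp only [List.count_cons]
      have := ih n h
      omega

theorem aZeros_grid (g : List (List Int)) (i : Nat) (r : List Int) (f : List Int → List Int)
    (h : g[i]? = some r) :
    aZeros (g.modify i f) + r.count 0 = aZeros g + (f r).count 0 := by
  induction g generalizing i with
  | nil => simp at h
  | cons a t ih =>
    cases i with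
    | zero =>
      simp only [List.getElem?_cons_zero, Option.some.injEq] at h
      subst h
      simp [List.modify, aZeros]
      omega
    | succ n =>
      simp only [List.getElem?_cons_succ] at h
      have he : (a :: t).modify (n + 1) f = a :: t.modify n f := rfl
      rw [he]
      simp only [aZeros, List.map_cons, List.sum_cons]
      have := ih n h
      simp only [aZeros] at this
      omega

theorem aSet2_zeros (g : List (List Int)) (i j : Int) (hi : 0 ≤ i) (hj : 0 ≤ j)
    (h : aGet2 g i j = 0) : aZeros (aSet2 g i j 1) + 1 = aZeros g := by
  unfold aGet2 at h
  rw [PySem.List.pyGet?_of_nonneg g hi] at h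
  cases hg : g[i.toNat]? with
  | none => rw [hg] at h; simp at h
  | some r =>
    rw [hg] at h
    simp only [Option.bind_some] at h
    rw [PySem.List.pyGet?_of_nonneg r hj] at h
    cases hr : r[j.toNat]? with
    | none => rw [hr] at h; simp at h
    | some v =>
      rw [hr] at h
      simp only [Option.getD_some] at h
      subst h
      unfold aSet2
      rw [if_pos ⟨hi, hj⟩]
      have h1 := aZeros_grid g i.toNat r (fun row => row.modify j.toNat (fun _ => 1)) hg
      beta_reduce at h1
      have h2 := aZeros_row r j.toNat hr
      omega

theorem aExpand_measure (maps : List String) (H W x y : Int)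
    (st : List (List Int) × List (Int × Int) × Int) (i : Int) :
    (aExpand maps H W x y st i).2.1.length + 2 * aZeros (aExpand maps H W x y st i).1
      ≤ st.2.1.length + 2 * aZeros st.1 := by
  simp only [aExpand]
  split
  · split
    · rename_i hb hc
      have := aSet2_zeros st.1 _ _ hb.1.1 hb.2.1 hc.2
      simp only [List.length_append, List.length_cons, List.length_nil]
      omega
    · exact le_refl _
  · exact le_refl _

theorem aExpand_fold_measure (maps : List String) (H W x y : Int)
    (st : List (List Int) × List (Int × Int) × Int) (L : List Int) :
    (L.foldl (aExpand maps H W x y) st).2.1.length + 2 * aZeros (L.foldl (aExpand maps H W x y) st).1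
      ≤ st.2.1.length + 2 * aZeros st.1 := by
  induction L generalizing st with
  | nil => exact le_refl _
  | cons a t ih =>
    exact le_trans (ih (aExpand maps H W x y st a)) (aExpand_measure maps H W x y st a)

-- 'while queue: x, y = queue.popleft(); for i in range(4): …'
def aLoop (maps : List String) (H W : Int)
    (vis : List (List Int)) (q : List (Int × Int)) (total : Int) :
    List (List Int) × Int :=
  match q with
  | [] => (vis, total)
  | (x, y) :: rest =>
      let st := (PySem.List.pyRange 0 4 1).foldl (aExpand maps H W x y) (vis, rest, total)
      aLoop maps H W st.1 st.2.1 st.2.2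
termination_by q.length + 2 * aZeros vis
decreasing_by
  have h := aExpand_fold_measure maps H W x y (vis, rest, total) (PySem.List.pyRange 0 4 1)
  simp_all
  omega

-- one (h, w) iteration of the doubly nested scan: seed, drain the queue, append the non-zero total
def aCell (maps : List String) (H W : Int)
    (st : List (List Int) × List (Int × Int) × List Int) (h w : Int) :
    List (List Int) × List (Int × Int) × List Int :=
  let seeded :=
    if aCharAt maps h w ≠ 'X' ∧ aGet2 st.1 h w = 0 then
      (aSet2 st.1 h w 1, st.2.1 ++ [(h, w)], (0 : Int) + aVal maps h w)
    else (st.1, st.2.1, (0 : Int))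
  let r := aLoop maps H W seeded.1 seeded.2.1 seeded.2.2
  if r.2 ≠ 0 then (r.1, [], st.2.2 ++ [r.2]) else (r.1, [], st.2.2)

def solution (maps : List String) : List Int :=
  let W : Int := PySem.Str.len ((PySem.List.pyGet? maps 0).getD "")   -- len(maps[0]); Pre_ excludes maps = []
  let H : Int := (maps.length : Int)
  let visited0 : List (List Int) :=
    (PySem.List.pyRange 0 H 1).map (fun _ => PySem.List.pyRepeat [(0 : Int)] W)
  let st := (PySem.List.pyRange 0 H 1).foldl
    (fun st h => (PySem.List.pyRange 0 W 1).foldl (fun st w => aCell maps H W st h w) st)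
    (visited0, ([] : List (Int × Int)), ([] : List Int))
  if st.2.2 = [] then [-1] else PySem.List.sorted st.2.2 (fun x => x) false

-- ===== PORT B =====

-- maps[c.1][c.2] for a coordinate pair (guarded in range at every use inside Pre_)
def bCharAt (maps : List String) (c : Int × Int) : Char :=
  (Option.bind (PySem.List.pyGet? maps c.1) (fun s => PySem.Str.pyGet? s c.2)).getD 'X'

-- int(maps[c[0]][c[1]]); Pre_ excludes the ValueError case
def bVal (maps : List String) (c : Int × Int) : Int :=
  (PySem.Int.ofChars? [bCharAt maps c]).getD 0

-- [(h, w) for h in range(H) for w in range(W) if maps[h][w] != 'X']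
def bCells (maps : List String) (H W : Int) : List (Int × Int) :=
  (PySem.List.pyRange 0 H 1).flatMap (fun h =>
    ((PySem.List.pyRange 0 W 1).filter (fun w => !(bCharAt maps (h, w) == 'X'))).map
      (fun w => (h, w)))

-- parent = {c: c for c in cells}
def bParent0 (cells : List (Int × Int)) : PySem.Dict (Int × Int) (Int × Int) :=
  cells.foldl (fun d c => d.insert c c) PySem.Dict.empty

-- 'while parent[c] != c: c = parent[c]; return c' — fuel-bounded transliteration; the fuel
-- parent.size is enough because parent pointers always aim at a strictly lex-smaller key
-- (a missing key — Python's KeyError — or exhausted fuel returns c; both are unreachable on Pre_)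
def bFind (parent : PySem.Dict (Int × Int) (Int × Int)) : Nat → (Int × Int) → (Int × Int)
  | 0, c => c
  | n + 1, c =>
      match parent.get? c with
      | some p => if p = c then c else bFind parent n p
      | none => c

def bFindFull (parent : PySem.Dict (Int × Int) (Int × Int)) (c : Int × Int) : Int × Int :=
  bFind parent (PySem.Dict.size parent) c

-- Python's tuple comparison ra < rb on int pairs (lexicographic)
def pairLt (a b : Int × Int) : Bool := a.1 < b.1 || (a.1 == b.1 && a.2 < b.2)

def pairMax (a b : Int × Int) : Int × Int := if pairLt a b then b else a
def pairMin (a b : Int × Int) : Int × Int := if pairLt b a then b else a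

-- 'if n in parent: ra, rb = find((h, w)), find(n); if ra != rb: parent[max(ra, rb)] = min(ra, rb)'
def bUnite (parent : PySem.Dict (Int × Int) (Int × Int)) (c n : Int × Int) :
    PySem.Dict (Int × Int) (Int × Int) :=
  if parent.contains n then
    let ra := bFindFull parent c
    let rb := bFindFull parent n
    if ra ≠ rb then parent.insert (pairMax ra rb) (pairMin ra rb) else parent
  else parent

-- the union pass: for (h, w) in cells: for n in ((h, w+1), (h+1, w)): …
def bBuild (cells : List (Int × Int)) : PySem.Dict (Int × Int) (Int × Int) :=
  cells.foldl (fun P c => [(c.1, c.2 + 1), (c.1 + 1, c.2)].foldl (fun P n => bUnite P c n) P)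
    (bParent0 cells)

-- sums[r] = sums.get(r, 0) + int(maps[c[0]][c[1]])
def bSums (maps : List String) (cells : List (Int × Int))
    (P : PySem.Dict (Int × Int) (Int × Int)) : PySem.Dict (Int × Int) Int :=
  cells.foldl (fun d c =>
    let r := bFindFull P c
    d.insert r (d.getD r 0 + bVal maps c)) PySem.Dict.empty

def solution_alt (maps : List String) : List Int :=
  let H : Int := (maps.length : Int)
  let W : Int := PySem.Str.len ((PySem.List.pyGet? maps 0).getD "")
  let cells := bCells maps H W
  let P := bBuild cells
  let sums := bSums maps cells P
  let totals := sums.values.filter (fun t => !(t == 0))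
  if totals = [] then [-1] else PySem.List.sorted totals (fun x => x) false

-- ===== PRECONDITION & SPEC =====

-- Pre_ is exactly where Python A returns: maps non-empty (else maps[0] is an IndexError), every row at
-- least as long as row 0 (else a scanned maps[h][w] is an IndexError), and every scanned character
-- (the first len(maps[0]) of each row) a digit or 'X' (else int(…) is a ValueError).
def Pre_solution (maps : List String) : Prop :=
  maps ≠ [] ∧ (maps.all (fun r =>
    decide (maps.headI.toList.length ≤ r.toList.length) &&
    (r.toList.take maps.headI.toList.length).all
      (fun c => c == 'X' || ('0' ≤ c && c ≤ '9')))) = true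
instance (maps : List String) : Decidable (Pre_solution maps) := by unfold Pre_solution; infer_instance

def pvWitness_solution : List String := ["X91", "150"]

def Spec_solution (maps : List String) (out : List Int) : Prop := out = solution_alt maps
instance (maps : List String) (out : List Int) : Decidable (Spec_solution maps out) := by unfold Spec_solution; infer_instance

-- ===== CLAIM (what is proved, stated in full; the proofs are below) =====
def Claim_equal_solution : Prop := ∀ (maps : List String), Dom_solution maps → Pre_solution maps → Spec_solution maps (solution maps)

-- ===== LEMMAS AND PROOFS =====

-- ===== proof-side abstractions =====

def gH (maps : List String) : Int := (maps.length : Int)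
def gW (maps : List String) : Int := (maps.headI.toList.length : Int)

def Ok (maps : List String) (c : Int × Int) : Prop :=
  (0 ≤ c.1 ∧ c.1 < gH maps) ∧ (0 ≤ c.2 ∧ c.2 < gW maps) ∧ aCharAt maps c.1 c.2 ≠ 'X'

def nbrs (c : Int × Int) : List (Int × Int) :=
  [(c.1 - 1, c.2), (c.1 + 1, c.2), (c.1, c.2 + 1), (c.1, c.2 - 1)]

-- strict scan (lexicographic) order on cells; Python's tuple <
def lexLt (a b : Int × Int) : Prop := a.1 < b.1 ∨ (a.1 = b.1 ∧ a.2 < b.2)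

noncomputable def allF (maps : List String) : Finset (Int × Int) :=
  Finset.Icc 0 (gH maps - 1) ×ˢ Finset.Icc 0 (gW maps - 1)

noncomputable def Avis (maps : List String) (g : List (List Int)) : Finset (Int × Int) :=
  (allF maps).filter (fun c => aGet2 g c.1 c.2 ≠ 0)

def cellVal (maps : List String) (c : Int × Int) : Int := aVal maps c.1 c.2

-- one undirected grid step between two non-'X' in-grid cells
def StepR (maps : List String) (a b : Int × Int) : Prop := b ∈ nbrs a ∧ Ok maps a ∧ Ok maps b

-- connectivity: a and b lie in one 4-connected non-'X' region
def Conn (maps : List String) : (Int × Int) → (Int × Int) → Prop :=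
  Relation.ReflTransGen (StepR maps)

noncomputable def compF (maps : List String) (c : Int × Int) : Finset (Int × Int) :=
  @Finset.filter _ (fun e => Conn maps c e) (Classical.decPred _) (allF maps)

noncomputable def compSum (maps : List String) (c : Int × Int) : Int :=
  (compF maps c).sum (cellVal maps)

-- c is the scan-first cell of its region
def isMin (maps : List String) (c : Int × Int) : Prop :=
  Ok maps c ∧ ∀ p, Ok maps p → Conn maps p c → ¬ lexLt p c

noncomputable def isMinB (maps : List String) (c : Int × Int) : Bool :=
  @decide (isMin maps c) (Classical.propDecidable _)

-- the scan order: all grid cells, row major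
def Sc (maps : List String) : List (Int × Int) :=
  (PySem.List.pyRange 0 (gH maps) 1).flatMap
    (fun h => (PySem.List.pyRange 0 (gW maps) 1).map (fun w => (h, w)))

-- the canonical pre-sort answer list both programs produce
noncomputable def canonL (maps : List String) : List Int :=
  (((Sc maps).filter (isMinB maps)).map (fun c => compSum maps c)).filter (fun t => !(t == 0))

-- closure of the worklist q through unvisited (∉ V) non-'X' cells
inductive Reach (maps : List String) (V : Finset (Int × Int)) (q : List (Int × Int)) :
    (Int × Int) → Prop
  | base (c : Int × Int) (hc : c ∈ q) : Reach maps V q c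
  | step (d c : Int × Int) (hd : Reach maps V q d) (hadj : c ∈ nbrs d)
      (hok : Ok maps c) (hnv : c ∉ V) : Reach maps V q c

-- ===== small facts =====

theorem lexLt_irrefl (a : Int × Int) : ¬ lexLt a a := by unfold lexLt; omega

theorem lexLt_trans {a b c : Int × Int} (h1 : lexLt a b) (h2 : lexLt b c) : lexLt a c := by
  unfold lexLt at *; omega

theorem lexLt_total {a b : Int × Int} (h : a ≠ b) : lexLt a b ∨ lexLt b a := by
  have : a.1 ≠ b.1 ∨ a.2 ≠ b.2 := by
    by_contra hc
    push Not at hc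
    exact h (Prod.ext hc.1 hc.2)
  unfold lexLt; omega

theorem lexLt_asymm {a b : Int × Int} (h : lexLt a b) : ¬ lexLt b a := by
  unfold lexLt at *; omega

theorem lexLt_ne {a b : Int × Int} (h : lexLt a b) : a ≠ b := by
  intro he; subst he; exact lexLt_irrefl a h

theorem mem_nbrs_symm {a b : Int × Int} (h : b ∈ nbrs a) : a ∈ nbrs b := by
  obtain ⟨a1, a2⟩ := a
  obtain ⟨b1, b2⟩ := b
  simp only [nbrs, List.mem_cons, List.not_mem_nil, or_false, Prod.mk.injEq] at *
  omega

theorem StepR_symm {maps : List String} {a b : Int × Int} (h : StepR maps a b) :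
    StepR maps b a := ⟨mem_nbrs_symm h.1, h.2.2, h.2.1⟩

theorem Conn_symm {maps : List String} {a b : Int × Int} (h : Conn maps a b) : Conn maps b a :=
  Relation.ReflTransGen.symmetric (fun _ _ hs => StepR_symm hs) h

theorem Conn_trans {maps : List String} {a b c : Int × Int} (h1 : Conn maps a b)
    (h2 : Conn maps b c) : Conn maps a c := Relation.ReflTransGen.trans h1 h2

theorem Ok_of_Conn {maps : List String} {a b : Int × Int} (h : Conn maps a b) (ha : Ok maps a) :
    Ok maps b := by
  induction h with
  | refl => exact ha
  | tail _ hs _ => exact hs.2.2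

theorem mem_allF (maps : List String) (c : Int × Int) :
    c ∈ allF maps ↔ (0 ≤ c.1 ∧ c.1 < gH maps) ∧ (0 ≤ c.2 ∧ c.2 < gW maps) := by
  simp only [allF, Finset.mem_product, Finset.mem_Icc]
  omega

theorem mem_allF_of_ok {maps : List String} {c : Int × Int} (h : Ok maps c) : c ∈ allF maps :=
  (mem_allF maps c).mpr ⟨h.1, h.2.1⟩

theorem mem_Avis (maps : List String) (g : List (List Int)) (c : Int × Int) :
    c ∈ Avis maps g ↔
      ((0 ≤ c.1 ∧ c.1 < gH maps) ∧ (0 ≤ c.2 ∧ c.2 < gW maps)) ∧ aGet2 g c.1 c.2 ≠ 0 := by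
  simp only [Avis, Finset.mem_filter, mem_allF]

theorem mem_compF (maps : List String) (c e : Int × Int) :
    e ∈ compF maps c ↔ e ∈ allF maps ∧ Conn maps c e := by
  simp only [compF, Finset.mem_filter]

theorem mem_Sc (maps : List String) (c : Int × Int) :
    c ∈ Sc maps ↔ (0 ≤ c.1 ∧ c.1 < gH maps) ∧ (0 ≤ c.2 ∧ c.2 < gW maps) := by
  simp only [Sc, List.mem_flatMap, List.mem_map, PySem.List.mem_pyRange_one]
  constructor
  · rintro ⟨h, hh, w, hw, rfl⟩
    exact ⟨hh, hw⟩
  · rintro ⟨hh, hw⟩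
    exact ⟨c.1, hh, c.2, hw, rfl⟩

theorem Sc_pairwise (maps : List String) : (Sc maps).Pairwise lexLt := by
  rw [Sc, List.pairwise_flatMap]
  constructor
  · intro h _
    rw [List.pairwise_map]
    exact (PySem.List.pairwise_lt_pyRange_one 0 (gW maps)).imp (fun hlt => Or.inr ⟨rfl, hlt⟩)
  · have := PySem.List.pairwise_lt_pyRange_one 0 (gH maps)
    refine this.imp ?_
    intro h1 h2 hlt x hx y hy
    simp only [List.mem_map] at hx hy
    obtain ⟨w1, _, rfl⟩ := hx
    obtain ⟨w2, _, rfl⟩ := hy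
    exact Or.inl hlt

-- prefix characterisation: in a lex-sorted list, the prefix before c is exactly
-- the members lex-smaller than c
theorem prefix_char {L Q rest : List (Int × Int)} {c : Int × Int}
    (hp : L.Pairwise lexLt) (h : L = Q ++ c :: rest) :
    ∀ p, p ∈ Q ↔ (p ∈ L ∧ lexLt p c) := by
  subst h
  rw [List.pairwise_append] at hp
  intro p
  constructor
  · intro hpq
    exact ⟨List.mem_append.mpr (Or.inl hpq), hp.2.2 p hpq c List.mem_cons_self⟩
  · rintro ⟨hm, hlt⟩
    rcases List.mem_append.mp hm with h1 | h2
    · exact h1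
    · rcases List.mem_cons.mp h2 with rfl | h3
      · exact absurd hlt (lexLt_irrefl p)
      · exact absurd hlt (lexLt_asymm ((List.pairwise_cons.mp hp.2.1).1 p h3))


-- ===== A-side flood-fill characterisation (loop-level) =====

theorem aGet2_eq_zero_elim (g : List (List Int)) (i j : Int) (hi : 0 ≤ i) (hj : 0 ≤ j)
    (h : aGet2 g i j = 0) : ∃ r, g[i.toNat]? = some r ∧ r[j.toNat]? = some 0 := by
  unfold aGet2 at h
  rw [PySem.List.pyGet?_of_nonneg g hi] at h
  cases hg : g[i.toNat]? with
  | none => rw [hg] at h; simp at h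
  | some r =>
    rw [hg] at h
    simp only [Option.bind_some] at h
    rw [PySem.List.pyGet?_of_nonneg r hj] at h
    cases hr : r[j.toNat]? with
    | none => rw [hr] at h; simp at h
    | some v =>
      rw [hr] at h
      simp only [Option.getD_some] at h
      subst h
      exact ⟨r, rfl, hr⟩

theorem aGet2_set_self (g : List (List Int)) (i j : Int) (hi : 0 ≤ i) (hj : 0 ≤ j)
    (h : aGet2 g i j = 0) : aGet2 (aSet2 g i j 1) i j = 1 := by
  obtain ⟨r, hg, hr⟩ := aGet2_eq_zero_elim g i j hi hj h
  unfold aSet2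
  rw [if_pos ⟨hi, hj⟩]
  unfold aGet2
  rw [PySem.List.pyGet?_of_nonneg _ hi, List.getElem?_modify, hg]
  simp only [Option.map_eq_map, Option.map_some, Option.bind_some]
  rw [if_pos trivial, PySem.List.pyGet?_of_nonneg _ hj, List.getElem?_modify, hr]
  simp

theorem aGet2_set_other (g : List (List Int)) (i j i' j' : Int) (hi : 0 ≤ i) (hj : 0 ≤ j)
    (hi' : 0 ≤ i') (hj' : 0 ≤ j') (hne : (i', j') ≠ (i, j)) :
    aGet2 (aSet2 g i j 1) i' j' = aGet2 g i' j' := by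
  unfold aSet2
  rw [if_pos ⟨hi, hj⟩]
  unfold aGet2
  rw [PySem.List.pyGet?_of_nonneg _ hi', PySem.List.pyGet?_of_nonneg g hi',
    List.getElem?_modify]
  by_cases hii : i.toNat = i'.toNat
  · have hjne : j' ≠ j := by
      intro hjj; apply hne; rw [hjj]; congr 1; omega
    simp only [hii]
    cases hg : g[i'.toNat]? with
    | none => simp
    | some r =>
      simp only [Option.map_eq_map, Option.map_some, Option.bind_some]
      rw [if_pos trivial, PySem.List.pyGet?_of_nonneg _ hj', PySem.List.pyGet?_of_nonneg r hj',
        List.getElem?_modify]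
      simp only [if_neg (show ¬ j.toNat = j'.toNat by omega)]
      simp
  · simp only [if_neg hii]
    simp

theorem Avis_set (maps : List String) (g : List (List Int)) (c : Int × Int)
    (hb : (0 ≤ c.1 ∧ c.1 < gH maps) ∧ (0 ≤ c.2 ∧ c.2 < gW maps))
    (h0 : aGet2 g c.1 c.2 = 0) :
    Avis maps (aSet2 g c.1 c.2 1) = insert c (Avis maps g) := by
  ext e
  rw [mem_Avis, Finset.mem_insert, mem_Avis]
  by_cases he : e = c
  · subst he
    rw [aGet2_set_self g e.1 e.2 hb.1.1 hb.2.1 h0]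
    simp [hb]
  · have hne : (e.1, e.2) ≠ (c.1, c.2) := by
      intro hx
      exact he (Prod.ext (congrArg Prod.fst hx) (congrArg Prod.snd hx))
    constructor
    · rintro ⟨hbe, hge⟩
      rw [aGet2_set_other g c.1 c.2 e.1 e.2 hb.1.1 hb.2.1 hbe.1.1 hbe.2.1 hne] at hge
      exact Or.inr ⟨hbe, hge⟩
    · rintro (hx | ⟨hbe, hge⟩)
      · exact absurd hx he
      · rw [aGet2_set_other g c.1 c.2 e.1 e.2 hb.1.1 hb.2.1 hbe.1.1 hbe.2.1 hne]
        exact ⟨hbe, hge⟩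

-- cell-level form of A's direction loop body (aExpand specialised to one neighbour cell)
def aStepC (maps : List String) (st : List (List Int) × List (Int × Int) × Int)
    (c : Int × Int) : List (List Int) × List (Int × Int) × Int :=
  if (0 ≤ c.1 ∧ c.1 < gH maps) ∧ (0 ≤ c.2 ∧ c.2 < gW maps) then
    if aCharAt maps c.1 c.2 ≠ 'X' ∧ aGet2 st.1 c.1 c.2 = 0 then
      (aSet2 st.1 c.1 c.2 1, st.2.1 ++ [c], st.2.2 + aVal maps c.1 c.2)
    else st
  else st

theorem aExpand_eq_foldC (maps : List String) (x y : Int)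
    (st : List (List Int) × List (Int × Int) × Int) :
    (PySem.List.pyRange 0 4 1).foldl (aExpand maps (gH maps) (gW maps) x y) st
      = (nbrs (x, y)).foldl (aStepC maps) st := by
  have h4 : PySem.List.pyRange 0 4 1 = [0, 1, 2, 3] := by decide
  rw [h4]
  have hstep : ∀ (st' : List (List Int) × List (Int × Int) × Int) (i nx ny : Int),
      x + PySem.List.pyGetD [(-1 : Int), 1, 0, 0] i 0 = nx →
      y + PySem.List.pyGetD [(0 : Int), 0, 1, -1] i 0 = ny →
      aExpand maps (gH maps) (gW maps) x y st' i = aStepC maps st' (nx, ny) := by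
    intro st' i nx ny hx hy
    simp only [aExpand, aStepC, hx, hy]
  simp only [List.foldl, nbrs]
  rw [hstep _ 0 (x - 1) y
        (by rw [show PySem.List.pyGetD [(-1 : Int), 1, 0, 0] 0 0 = -1 from by decide]; ring)
        (by rw [show PySem.List.pyGetD [(0 : Int), 0, 1, -1] 0 0 = 0 from by decide]; ring),
      hstep _ 1 (x + 1) y
        (by rw [show PySem.List.pyGetD [(-1 : Int), 1, 0, 0] 1 0 = 1 from by decide])
        (by rw [show PySem.List.pyGetD [(0 : Int), 0, 1, -1] 1 0 = 0 from by decide]; ring),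
      hstep _ 2 x (y + 1)
        (by rw [show PySem.List.pyGetD [(-1 : Int), 1, 0, 0] 2 0 = 0 from by decide]; ring)
        (by rw [show PySem.List.pyGetD [(0 : Int), 0, 1, -1] 2 0 = 1 from by decide]),
      hstep _ 3 x (y - 1)
        (by rw [show PySem.List.pyGetD [(-1 : Int), 1, 0, 0] 3 0 = 0 from by decide]; ring)
        (by rw [show PySem.List.pyGetD [(0 : Int), 0, 1, -1] 3 0 = -1 from by decide]; ring)]

-- A's condition for marking a cell, in set form
theorem aStepC_cond (maps : List String) (g : List (List Int)) (c : Int × Int) :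
    (((0 ≤ c.1 ∧ c.1 < gH maps) ∧ (0 ≤ c.2 ∧ c.2 < gW maps)) ∧
      (aCharAt maps c.1 c.2 ≠ 'X' ∧ aGet2 g c.1 c.2 = 0)) ↔
      (Ok maps c ∧ c ∉ Avis maps g) := by
  rw [mem_Avis]
  unfold Ok
  constructor
  · rintro ⟨hb, hch, h0⟩
    exact ⟨⟨hb.1, hb.2, hch⟩, by intro ⟨_, hne⟩; exact hne h0⟩
  · rintro ⟨⟨h1, h2, hch⟩, hnv⟩
    refine ⟨⟨h1, h2⟩, hch, ?_⟩
    by_cases h0 : aGet2 g c.1 c.2 = 0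
    · exact h0
    · exact absurd ⟨⟨h1, h2⟩, h0⟩ hnv

theorem aFoldL_spec (maps : List String) (L : List (Int × Int)) :
    ∀ (g : List (List Int)) (q : List (Int × Int)) (t : Int),
    (∀ e, e ∈ Avis maps (L.foldl (aStepC maps) (g, q, t)).1 ↔
        e ∈ Avis maps g ∨ (e ∈ L ∧ Ok maps e ∧ e ∉ Avis maps g))
    ∧ (∀ e, e ∈ (L.foldl (aStepC maps) (g, q, t)).2.1 ↔
        e ∈ q ∨ (e ∈ L ∧ Ok maps e ∧ e ∉ Avis maps g))
    ∧ (L.foldl (aStepC maps) (g, q, t)).2.2 =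
        t + ((Avis maps (L.foldl (aStepC maps) (g, q, t)).1).sum (cellVal maps)
              - (Avis maps g).sum (cellVal maps)) := by
  induction L with
  | nil => intro g q t; simp
  | cons c L' ih =>
    intro g q t
    simp only [List.foldl_cons]
    by_cases hc : ((0 ≤ c.1 ∧ c.1 < gH maps) ∧ (0 ≤ c.2 ∧ c.2 < gW maps)) ∧
        (aCharAt maps c.1 c.2 ≠ 'X' ∧ aGet2 g c.1 c.2 = 0)
    · have hok : Ok maps c ∧ c ∉ Avis maps g := (aStepC_cond maps g c).mp hc
      have hstep : aStepC maps (g, q, t) c =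
          (aSet2 g c.1 c.2 1, q ++ [c], t + aVal maps c.1 c.2) := by
        simp only [aStepC]
        rw [if_pos hc.1, if_pos hc.2]
      rw [hstep]
      have hA : Avis maps (aSet2 g c.1 c.2 1) = insert c (Avis maps g) :=
        Avis_set maps g c hc.1 hc.2.2
      obtain ⟨ih1, ih2, ih3⟩ := ih (aSet2 g c.1 c.2 1) (q ++ [c]) (t + aVal maps c.1 c.2)
      refine ⟨?_, ?_, ?_⟩
      · intro e
        rw [ih1, hA, Finset.mem_insert]
        by_cases he : e = c
        · subst he
          simp [hok.1, hok.2]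
        · simp only [List.mem_cons]
          constructor
          · rintro ((rfl | h) | ⟨hL, hOk, hnv⟩)
            · exact absurd rfl he
            · exact Or.inl h
            · exact Or.inr ⟨Or.inr hL, hOk, fun hx => hnv (Or.inr hx)⟩
          · rintro (h | ⟨(rfl | hL), hOk, hnv⟩)
            · exact Or.inl (Or.inr h)
            · exact absurd rfl he
            · exact Or.inr ⟨hL, hOk, fun hx => (by
                rcases hx with hx | hx
                · exact he hx
                · exact hnv hx)⟩
      · intro e
        rw [ih2, hA, List.mem_append, List.mem_singleton]
        by_cases he : e = c
        · subst he
          simp [hok.1, hok.2]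
        · simp only [Finset.mem_insert, List.mem_cons]
          constructor
          · rintro ((h | rfl) | ⟨hL, hOk, hnv⟩)
            · exact Or.inl h
            · exact absurd rfl he
            · exact Or.inr ⟨Or.inr hL, hOk, fun hx => hnv (Or.inr hx)⟩
          · rintro (h | ⟨(rfl | hL), hOk, hnv⟩)
            · exact Or.inl (Or.inl h)
            · exact absurd rfl he
            · exact Or.inr ⟨hL, hOk, fun hx => (by
                rcases hx with hx | hx
                · exact he hx
                · exact hnv hx)⟩
      · rw [ih3, hA, Finset.sum_insert hok.2]
        unfold cellVal
        ring
    · have hvac : ¬ (Ok maps c ∧ c ∉ Avis maps g) := fun h => hc ((aStepC_cond maps g c).mpr h)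
      have hstep : aStepC maps (g, q, t) c = (g, q, t) := by
        simp only [aStepC]
        by_cases h1 : (0 ≤ c.1 ∧ c.1 < gH maps) ∧ (0 ≤ c.2 ∧ c.2 < gW maps)
        · rw [if_pos h1, if_neg (fun h2 => hc ⟨h1, h2⟩)]
        · rw [if_neg h1]
      rw [hstep]
      obtain ⟨ih1, ih2, ih3⟩ := ih g q t
      refine ⟨?_, ?_, ih3⟩
      · intro e
        rw [ih1]
        simp only [List.mem_cons]
        constructor
        · rintro (h | ⟨hL, hOk, hnv⟩)
          · exact Or.inl h
          · exact Or.inr ⟨Or.inr hL, hOk, hnv⟩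
        · rintro (h | ⟨(rfl | hL), hOk, hnv⟩)
          · exact Or.inl h
          · exact absurd ⟨hOk, hnv⟩ hvac
          · exact Or.inr ⟨hL, hOk, hnv⟩
      · intro e
        rw [ih2]
        simp only [List.mem_cons]
        constructor
        · rintro (h | ⟨hL, hOk, hnv⟩)
          · exact Or.inl h
          · exact Or.inr ⟨Or.inr hL, hOk, hnv⟩
        · rintro (h | ⟨(rfl | hL), hOk, hnv⟩)
          · exact Or.inl h
          · exact absurd ⟨hOk, hnv⟩ hvac
          · exact Or.inr ⟨hL, hOk, hnv⟩

theorem Reach_nil (maps : List String) (V : Finset (Int × Int)) (e : Int × Int)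
    (h : Reach maps V [] e) : False := by
  induction h with
  | base c hc => simp at hc
  | step d c hd hadj hok hnv ih => exact ih

theorem Reach_mem (maps : List String) (V : Finset (Int × Int)) (q : List (Int × Int))
    (d : Int × Int) (h : Reach maps V q d) (hv : d ∈ V) : d ∈ q := by
  cases h with
  | base c hc => exact hc
  | step d' c hd hadj hok hnv => exact absurd hv hnv

-- replacing the worklist head by its fresh neighbours preserves the reachable closure
theorem Reach_transfer (maps : List String) (V V₂ : Finset (Int × Int))
    (q rest q₂ : List (Int × Int)) (x : Int × Int)
    (hxV : x ∈ V) (hxq : x ∈ q)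
    (hsplit : ∀ e ∈ q, e = x ∨ e ∈ rest)
    (hrest : ∀ e ∈ rest, e ∈ q)
    (hV₂ : ∀ e, e ∈ V₂ ↔ e ∈ V ∨ (e ∈ nbrs x ∧ Ok maps e ∧ e ∉ V))
    (hq₂ : ∀ e, e ∈ q₂ ↔ e ∈ rest ∨ (e ∈ nbrs x ∧ Ok maps e ∧ e ∉ V)) :
    ∀ e, (e ∈ V₂ ∨ Reach maps V₂ q₂ e) ↔ (e ∈ V ∨ Reach maps V q e) := by
  have hfresh : ∀ e, (e ∈ nbrs x ∧ Ok maps e ∧ e ∉ V) → Reach maps V q e := by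
    rintro e ⟨hn, ho, hv⟩
    exact Reach.step x e (Reach.base x hxq) hn ho hv
  have hVsub : ∀ e, e ∈ V → e ∈ V₂ := fun e he => (hV₂ e).mpr (Or.inl he)
  have dir1 : ∀ e, Reach maps V₂ q₂ e → e ∈ V ∨ Reach maps V q e := by
    intro e he
    induction he with
    | base c hc =>
      rcases (hq₂ c).mp hc with h | h
      · exact Or.inr (Reach.base c (hrest c h))
      · exact Or.inr (hfresh c h)
    | step d c hd hadj hok hnv ih =>
      have hcV : c ∉ V := fun hx => hnv (hVsub c hx)
      rcases ih with hdV | hdR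
      · have hdq : d ∈ q := Reach_mem maps V q d (by
          rcases (hq₂ d).mp (Reach_mem maps V₂ q₂ d hd ((hV₂ d).mpr (Or.inl hdV))) with h | h
          · exact Reach.base d (hrest d h)
          · exact hfresh d h) hdV
        rcases hsplit d hdq with rfl | hdr
        · exact Or.inr (Reach.step d c (Reach.base d hxq) hadj hok hcV)
        · exact Or.inr (Reach.step d c (Reach.base d (hrest d hdr)) hadj hok hcV)
      · exact Or.inr (Reach.step d c hdR hadj hok hcV)
  have dir2 : ∀ e, Reach maps V q e → e ∈ V₂ ∨ Reach maps V₂ q₂ e := by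
    intro e he
    induction he with
    | base c hc =>
      rcases hsplit c hc with rfl | hcr
      · exact Or.inl (hVsub c hxV)
      · exact Or.inr (Reach.base c ((hq₂ c).mpr (Or.inl hcr)))
    | step d c hd hadj hok hnv ih =>
      by_cases hnx : c ∈ nbrs x
      · exact Or.inl ((hV₂ c).mpr (Or.inr ⟨hnx, hok, hnv⟩))
      · have hcV₂ : c ∉ V₂ := by
          intro hx
          rcases (hV₂ c).mp hx with h | h
          · exact hnv h
          · exact hnx h.1
        rcases ih with hdV₂ | hdR₂
        · rcases (hV₂ d).mp hdV₂ with hdV | hdF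
          · have hdq : d ∈ q := Reach_mem maps V q d hd hdV
            rcases hsplit d hdq with rfl | hdr
            · exact absurd hadj hnx
            · exact Or.inr (Reach.step d c
                (Reach.base d ((hq₂ d).mpr (Or.inl hdr))) hadj hok hcV₂)
          · exact Or.inr (Reach.step d c
              (Reach.base d ((hq₂ d).mpr (Or.inr hdF))) hadj hok hcV₂)
        · exact Or.inr (Reach.step d c hdR₂ hadj hok hcV₂)
  intro e
  constructor
  · rintro (h | h)
    · rcases (hV₂ e).mp h with h' | h'
      · exact Or.inl h'
      · exact Or.inr (hfresh e h')
    · exact dir1 e h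
  · rintro (h | h)
    · exact Or.inl (hVsub e h)
    · exact dir2 e h

theorem aLoop_spec (maps : List String) (g : List (List Int)) (q : List (Int × Int)) (t : Int)
    (hq : ∀ c ∈ q, c ∈ Avis maps g) (hOk : ∀ c ∈ q, Ok maps c) :
    (∀ e, e ∈ Avis maps (aLoop maps (gH maps) (gW maps) g q t).1 ↔
        e ∈ Avis maps g ∨ Reach maps (Avis maps g) q e)
    ∧ (aLoop maps (gH maps) (gW maps) g q t).2 =
        t + ((Avis maps (aLoop maps (gH maps) (gW maps) g q t).1).sum (cellVal maps)
              - (Avis maps g).sum (cellVal maps)) := by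
  fun_induction aLoop maps (gH maps) (gW maps) g q t with
  | case1 g t =>
    refine ⟨fun e => ⟨Or.inl, ?_⟩, by ring⟩
    rintro (h | h)
    · exact h
    · exact absurd h (fun h' => Reach_nil maps (Avis maps g) e h')
  | case2 g t x y rest st ih =>
    simp only [st] at ih ⊢
    rw [aExpand_eq_foldC maps x y (g, rest, t)] at ih ⊢
    obtain ⟨f1, f2, f3⟩ := aFoldL_spec maps (nbrs (x, y)) g rest t
    have hq' : ∀ c ∈ ((nbrs (x, y)).foldl (aStepC maps) (g, rest, t)).2.1,
        c ∈ Avis maps ((nbrs (x, y)).foldl (aStepC maps) (g, rest, t)).1 := by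
      intro c hc
      rcases (f2 c).mp hc with h | h
      · exact (f1 c).mpr (Or.inl (hq c (List.mem_cons_of_mem _ h)))
      · exact (f1 c).mpr (Or.inr h)
    have hOk' : ∀ c ∈ ((nbrs (x, y)).foldl (aStepC maps) (g, rest, t)).2.1, Ok maps c := by
      intro c hc
      rcases (f2 c).mp hc with h | h
      · exact hOk c (List.mem_cons_of_mem _ h)
      · exact h.2.1
    obtain ⟨ih1, ih2⟩ := ih hq' hOk'
    have htr := Reach_transfer maps (Avis maps g)
      (Avis maps ((nbrs (x, y)).foldl (aStepC maps) (g, rest, t)).1)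
      ((x, y) :: rest) rest ((nbrs (x, y)).foldl (aStepC maps) (g, rest, t)).2.1 (x, y)
      (hq (x, y) List.mem_cons_self) List.mem_cons_self
      (fun e he => List.mem_cons.mp he)
      (fun e he => List.mem_cons_of_mem _ he)
      f1 f2
    refine ⟨fun e => (ih1 e).trans (htr e), ?_⟩
    rw [ih2, f3]
    ring

theorem aLoop_nil (maps : List String) (H W : Int) (g : List (List Int)) (t : Int) :
    aLoop maps H W g [] t = (g, t) := by
  unfold aLoop
  rfl

theorem Avis_init (maps : List String) :
    Avis maps ((PySem.List.pyRange 0 (gH maps) 1).map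
      (fun _ => PySem.List.pyRepeat [(0 : Int)] (gW maps))) = ∅ := by
  ext e
  simp only [Finset.notMem_empty, iff_false]
  rw [mem_Avis]
  rintro ⟨⟨h1, h2⟩, hne⟩
  apply hne
  unfold aGet2
  rw [PySem.List.pyGet?_of_nonneg _ h1.1]
  have hlen : ((PySem.List.pyRange 0 (gH maps) 1).map
      (fun _ => PySem.List.pyRepeat [(0 : Int)] (gW maps))).length = (gH maps).toNat := by
    rw [List.length_map, PySem.List.length_pyRange_one]
    omega
  have hi : e.1.toNat < ((PySem.List.pyRange 0 (gH maps) 1).map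
      (fun _ => PySem.List.pyRepeat [(0 : Int)] (gW maps))).length := by
    rw [hlen]; omega
  rw [List.getElem?_eq_getElem hi, List.getElem_map]
  simp only [Option.bind_some]
  rw [PySem.List.pyGet?_of_nonneg _ h2.1, PySem.List.pyRepeat_singleton,
    List.getElem?_replicate, if_pos (by omega)]
  rfl


-- Avis is closed under region steps once it satisfies the scan invariant
theorem Avis_conn_closed (maps : List String) (g : List (List Int))
    (hcl : ∀ e ∈ Avis maps g, ∀ e', StepR maps e e' → e' ∈ Avis maps g) :
    ∀ e ∈ Avis maps g, ∀ e', Conn maps e e' → e' ∈ Avis maps g := by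
  intro e he e' hc
  induction hc with
  | refl => exact he
  | tail hc' hs ih => exact hcl _ ih _ hs

-- flood fill from a fresh seed c visits exactly c's region and totals its sum
theorem aCell_true_char (maps : List String) (g : List (List Int)) (c : Int × Int)
    (hcl : ∀ e ∈ Avis maps g, ∀ e', StepR maps e e' → e' ∈ Avis maps g)
    (hOkA : ∀ e ∈ Avis maps g, Ok maps e)
    (hok : Ok maps c) (hnv : c ∉ Avis maps g) :
    (∀ e, e ∈ Avis maps (aLoop maps (gH maps) (gW maps) (aSet2 g c.1 c.2 1) [c]
        ((0 : Int) + aVal maps c.1 c.2)).1 ↔ e ∈ Avis maps g ∨ Conn maps c e) ∧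
    (aLoop maps (gH maps) (gW maps) (aSet2 g c.1 c.2 1) [c]
        ((0 : Int) + aVal maps c.1 c.2)).2 = compSum maps c := by
  have hb : (0 ≤ c.1 ∧ c.1 < gH maps) ∧ (0 ≤ c.2 ∧ c.2 < gW maps) := ⟨hok.1, hok.2.1⟩
  have h0 : aGet2 g c.1 c.2 = 0 := by
    by_contra hne
    exact hnv ((mem_Avis maps g c).mpr ⟨hb, hne⟩)
  have hA1 : Avis maps (aSet2 g c.1 c.2 1) = insert c (Avis maps g) := Avis_set maps g c hb h0
  obtain ⟨l1, l2⟩ := aLoop_spec maps (aSet2 g c.1 c.2 1) [c] ((0 : Int) + aVal maps c.1 c.2)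
    (by intro x hx; rw [List.mem_singleton] at hx; subst hx; rw [hA1]; exact Finset.mem_insert_self _ _)
    (by intro x hx; rw [List.mem_singleton] at hx; subst hx; exact hok)
  -- transfer: insert-c-plus-Reach is exactly old-Avis-or-region-of-c
  have htr : ∀ e, (e ∈ Avis maps (aSet2 g c.1 c.2 1) ∨
      Reach maps (Avis maps (aSet2 g c.1 c.2 1)) [c] e) ↔ (e ∈ Avis maps g ∨ Conn maps c e) := by
    intro e
    rw [hA1]
    constructor
    · rintro (he | he)
      · rcases Finset.mem_insert.mp he with rfl | he'
        · exact Or.inr Relation.ReflTransGen.refl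
        · exact Or.inl he'
      · clear l1 l2
        induction he with
        | base x hx => rw [List.mem_singleton] at hx; subst hx; exact Or.inr Relation.ReflTransGen.refl
        | step d x hd hadj hokx hnvx ih =>
          rcases ih with hdV | hdC
          · exact absurd (Finset.mem_insert_of_mem (hcl d hdV x ⟨hadj, hOkA d hdV, hokx⟩)) hnvx
          · exact Or.inr (Relation.ReflTransGen.tail hdC ⟨hadj, Ok_of_Conn hdC hok, hokx⟩)
    · rintro (he | he)
      · exact Or.inl (Finset.mem_insert_of_mem he)
      · induction he with
        | refl => exact Or.inl (Finset.mem_insert_self _ _)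
        | @tail d e' hcd hs ih =>
          by_cases hin : e' ∈ insert c (Avis maps g)
          · exact Or.inl hin
          · rcases ih with hdI | hdR
            · rcases Finset.mem_insert.mp hdI with rfl | hdV
              · exact Or.inr (Reach.step d e' (Reach.base d List.mem_cons_self) hs.1 hs.2.2 hin)
              · exact absurd (Finset.mem_insert_of_mem (hcl d hdV e' hs)) hin
            · exact Or.inr (Reach.step d e' hdR hs.1 hs.2.2 hin)
  have hiff : ∀ e, e ∈ Avis maps (aLoop maps (gH maps) (gW maps) (aSet2 g c.1 c.2 1) [c]
      ((0 : Int) + aVal maps c.1 c.2)).1 ↔ e ∈ Avis maps g ∨ Conn maps c e :=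
    fun e => (l1 e).trans (htr e)
  refine ⟨hiff, ?_⟩
  have hdisj : Disjoint (Avis maps g) (compF maps c) := by
    rw [Finset.disjoint_left]
    intro e he hec
    have hce : Conn maps c e := ((mem_compF maps c e).mp hec).2
    exact hnv (Avis_conn_closed maps g hcl e he c (Conn_symm hce))
  have hAF : Avis maps (aLoop maps (gH maps) (gW maps) (aSet2 g c.1 c.2 1) [c]
      ((0 : Int) + aVal maps c.1 c.2)).1 = Avis maps g ∪ compF maps c := by
    ext e
    rw [hiff e, Finset.mem_union, mem_compF]
    constructor
    · rintro (h | h)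
      · exact Or.inl h
      · exact Or.inr ⟨mem_allF_of_ok (Ok_of_Conn h hok), h⟩
    · rintro (h | h)
      · exact Or.inl h
      · exact Or.inr h.2
  rw [l2, hAF, hA1, Finset.sum_union hdisj, Finset.sum_insert hnv]
  have hv : cellVal maps c = aVal maps c.1 c.2 := rfl
  rw [← hv]
  unfold compSum
  ring

-- the full scan: answers accumulate exactly the nonzero region sums of scan-first cells
theorem aScan (maps : List String) :
    ∀ (rest P : List (Int × Int)) (g : List (List Int)) (ans : List Int),
    Sc maps = P ++ rest →
    (∀ e, e ∈ Avis maps g ↔ ∃ p ∈ P, Ok maps p ∧ Conn maps p e) →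
    (rest.foldl (fun st c => aCell maps (gH maps) (gW maps) st c.1 c.2) (g, [], ans)).2.1 = [] ∧
    (rest.foldl (fun st c => aCell maps (gH maps) (gW maps) st c.1 c.2) (g, [], ans)).2.2
      = ans ++ ((rest.filter (isMinB maps)).map (fun c => compSum maps c)).filter
          (fun t => !(t == 0)) := by
  intro rest
  induction rest with
  | nil => intro P g ans _ _; simp
  | cons c rest' ih =>
    intro P g ans hscan hinv
    have hcSc : c ∈ Sc maps := by rw [hscan]; exact List.mem_append.mpr (Or.inr List.mem_cons_self)
    have hbc := (mem_Sc maps c).mp hcSc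
    have hP : ∀ p, p ∈ P ↔ (p ∈ Sc maps ∧ lexLt p c) := prefix_char (Sc_pairwise maps) hscan
    have hOkA : ∀ e ∈ Avis maps g, Ok maps e := by
      intro e he
      obtain ⟨p, _, hp, hc⟩ := (hinv e).mp he
      exact Ok_of_Conn hc hp
    have hcl : ∀ e ∈ Avis maps g, ∀ e', StepR maps e e' → e' ∈ Avis maps g := by
      intro e he e' hs
      obtain ⟨p, hpP, hp, hc⟩ := (hinv e).mp he
      exact (hinv e').mpr ⟨p, hpP, hp, Relation.ReflTransGen.tail hc hs⟩
    have hscan' : Sc maps = (P ++ [c]) ++ rest' := by rw [hscan]; simp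
    simp only [List.foldl_cons]
    by_cases hcond : aCharAt maps c.1 c.2 ≠ 'X' ∧ aGet2 g c.1 c.2 = 0
    · -- fresh non-'X' seed: flood fill its region
      have hokc : Ok maps c := ⟨hbc.1, hbc.2, hcond.1⟩
      have hnvc : c ∉ Avis maps g := by
        intro hmem
        exact absurd hcond.2 (by
          have := ((mem_Avis maps g c).mp hmem).2
          intro h0; exact this h0)
      obtain ⟨hiff, hsum⟩ := aCell_true_char maps g c hcl hOkA hokc hnvc
      have hmin : isMin maps c := by
        refine ⟨hokc, ?_⟩
        intro p hpok hpc hlt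
        exact hnvc ((hinv c).mpr ⟨p, (hP p).mpr ⟨(mem_Sc maps p).mpr ⟨hpok.1, hpok.2.1⟩, hlt⟩,
          hpok, hpc⟩)
      have hminB : isMinB maps c = true := by
        unfold isMinB
        exact @decide_eq_true _ (Classical.propDecidable _) hmin
      have hcell : aCell maps (gH maps) (gW maps) (g, [], ans) c.1 c.2 =
          ((aLoop maps (gH maps) (gW maps) (aSet2 g c.1 c.2 1) [c]
              ((0 : Int) + aVal maps c.1 c.2)).1, [],
            if compSum maps c ≠ 0 then ans ++ [compSum maps c] else ans) := by
        simp only [aCell]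
        rw [if_pos hcond]
        simp only [List.nil_append]
        rw [hsum]
        by_cases hz : compSum maps c ≠ 0
        · rw [if_pos hz, if_pos hz]
        · rw [if_neg hz, if_neg hz]
      rw [hcell]
      have hinv' : ∀ e, e ∈ Avis maps (aLoop maps (gH maps) (gW maps) (aSet2 g c.1 c.2 1) [c]
          ((0 : Int) + aVal maps c.1 c.2)).1 ↔ ∃ p ∈ P ++ [c], Ok maps p ∧ Conn maps p e := by
        intro e
        rw [hiff e]
        constructor
        · rintro (he | he)
          · obtain ⟨p, hpP, hx⟩ := (hinv e).mp he
            exact ⟨p, List.mem_append.mpr (Or.inl hpP), hx⟩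
          · exact ⟨c, List.mem_append.mpr (Or.inr List.mem_cons_self), hokc, he⟩
        · rintro ⟨p, hpm, hpok, hpc⟩
          rcases List.mem_append.mp hpm with hpP | hpc'
          · exact Or.inl ((hinv e).mpr ⟨p, hpP, hpok, hpc⟩)
          · rw [List.mem_singleton] at hpc'
            subst hpc'
            exact Or.inr hpc
      obtain ⟨ih1, ih2⟩ := ih (P ++ [c]) _ _ hscan' hinv'
      refine ⟨ih1, ?_⟩
      rw [ih2]
      rw [List.filter_cons_of_pos hminB, List.map_cons]
      by_cases hz : compSum maps c = 0
      · rw [if_neg (by simpa using hz), List.filter_cons_of_neg (by simp [hz])]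
      · rw [if_pos hz, List.filter_cons_of_pos (by simpa using hz)]
        simp
    · -- 'X' or already visited: nothing happens
      have hcell : aCell maps (gH maps) (gW maps) (g, [], ans) c.1 c.2 = (g, [], ans) := by
        simp only [aCell]
        rw [if_neg hcond]
        simp only [aLoop_nil]
        norm_num
      rw [hcell]
      have hnotmin : ¬ isMin maps c := by
        intro hmin
        have hokc := hmin.1
        have hch : aCharAt maps c.1 c.2 ≠ 'X' := hokc.2.2
        have hg : aGet2 g c.1 c.2 ≠ 0 := fun h0 => hcond ⟨hch, h0⟩
        have hmem : c ∈ Avis maps g := (mem_Avis maps g c).mpr ⟨hbc, hg⟩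
        obtain ⟨p, hpP, hpok, hpc⟩ := (hinv c).mp hmem
        exact hmin.2 p hpok hpc ((hP p).mp hpP).2
      have hminB : isMinB maps c = false := by
        unfold isMinB
        exact @decide_eq_false _ (Classical.propDecidable _) hnotmin
      have hinv' : ∀ e, e ∈ Avis maps g ↔ ∃ p ∈ P ++ [c], Ok maps p ∧ Conn maps p e := by
        intro e
        rw [hinv e]
        constructor
        · rintro ⟨p, hpP, hx⟩
          exact ⟨p, List.mem_append.mpr (Or.inl hpP), hx⟩
        · rintro ⟨p, hpm, hpok, hpc⟩
          rcases List.mem_append.mp hpm with hpP | hpc'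
          · exact ⟨p, hpP, hpok, hpc⟩
          · rw [List.mem_singleton] at hpc'
            rw [hpc'] at hpok hpc
            -- c itself: c must already be visited (else its cell were fresh)
            rcases Classical.em (aCharAt maps c.1 c.2 ≠ 'X') with hch | hch
            · have hg : aGet2 g c.1 c.2 ≠ 0 := fun h0 => hcond ⟨hch, h0⟩
              have hmem : c ∈ Avis maps g := (mem_Avis maps g c).mpr ⟨hbc, hg⟩
              obtain ⟨p', hp'P, hp'ok, hp'c⟩ := (hinv c).mp hmem
              exact ⟨p', hp'P, hp'ok, Conn_trans hp'c hpc⟩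
            · exact absurd hpok.2.2 hch
      obtain ⟨ih1, ih2⟩ := ih (P ++ [c]) _ _ hscan' hinv'
      refine ⟨ih1, ?_⟩
      rw [ih2, List.filter_cons_of_neg (by simp [hminB])]


-- A computes the canonical list, then sorts (or returns [-1])
theorem solution_eq_canon (maps : List String) (hne : maps ≠ []) :
    solution maps =
      (if canonL maps = [] then [-1]
       else PySem.List.sorted (canonL maps) (fun x => x) false) := by
  obtain ⟨m0, mrest, rfl⟩ := List.exists_cons_of_ne_nil hne
  have hW : PySem.Str.len ((PySem.List.pyGet? (m0 :: mrest) 0).getD "") = gW (m0 :: mrest) := by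
    rw [PySem.List.pyGet?_zero_cons, Option.getD_some, PySem.Str.len_eq]
    rfl
  have hH : ((m0 :: mrest).length : Int) = gH (m0 :: mrest) := rfl
  simp only [solution]
  rw [hW, hH]
  have hfold : (PySem.List.pyRange 0 (gH (m0 :: mrest)) 1).foldl
      (fun st h => (PySem.List.pyRange 0 (gW (m0 :: mrest)) 1).foldl
        (fun st w => aCell (m0 :: mrest) (gH (m0 :: mrest)) (gW (m0 :: mrest)) st h w) st)
      (((PySem.List.pyRange 0 (gH (m0 :: mrest)) 1).map
          (fun _ => PySem.List.pyRepeat [(0 : Int)] (gW (m0 :: mrest)))), [], [])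
      = (Sc (m0 :: mrest)).foldl
        (fun st c => aCell (m0 :: mrest) (gH (m0 :: mrest)) (gW (m0 :: mrest)) st c.1 c.2)
        (((PySem.List.pyRange 0 (gH (m0 :: mrest)) 1).map
          (fun _ => PySem.List.pyRepeat [(0 : Int)] (gW (m0 :: mrest)))), [], []) := by
    rw [Sc, List.foldl_flatMap]
    congr 1
    funext st h
    rw [List.foldl_map]
  rw [hfold]
  have hinv0 : ∀ e, e ∈ Avis (m0 :: mrest) ((PySem.List.pyRange 0 (gH (m0 :: mrest)) 1).map
      (fun _ => PySem.List.pyRepeat [(0 : Int)] (gW (m0 :: mrest)))) ↔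
      ∃ p ∈ ([] : List (Int × Int)), Ok (m0 :: mrest) p ∧ Conn (m0 :: mrest) p e := by
    intro e
    rw [Avis_init]
    simp
  obtain ⟨h1, h2⟩ := aScan (m0 :: mrest) (Sc (m0 :: mrest)) [] _ [] (by simp) hinv0
  rw [h2]
  rfl


-- ===== B-side: union-find characterisation =====

theorem bCharAt_eq (maps : List String) (c : Int × Int) :
    bCharAt maps c = aCharAt maps c.1 c.2 := rfl

theorem bVal_eq (maps : List String) (c : Int × Int) : bVal maps c = cellVal maps c := rfl

theorem filter_flatMap {α β : Type} (l : List α) (f : α → List β) (p : β → Bool) :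
    (l.flatMap f).filter p = l.flatMap (fun a => (f a).filter p) := by
  induction l with
  | nil => rfl
  | cons a t ih => simp [List.flatMap_cons, List.filter_append, ih]

-- B's cell list is the scan order restricted to non-'X' cells
theorem cells_eq_filter (maps : List String) :
    bCells maps (gH maps) (gW maps)
      = (Sc maps).filter (fun c => !(bCharAt maps c == 'X')) := by
  rw [Sc, bCells, filter_flatMap]
  congr 1
  funext h
  rw [List.filter_map]
  rfl

theorem mem_cells (maps : List String) (c : Int × Int) :
    c ∈ bCells maps (gH maps) (gW maps) ↔ Ok maps c := by
  rw [cells_eq_filter, List.mem_filter, mem_Sc]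
  unfold Ok
  rw [bCharAt_eq]
  constructor
  · rintro ⟨⟨h1, h2⟩, h3⟩
    refine ⟨h1, h2, ?_⟩
    simpa using h3
  · rintro ⟨h1, h2, h3⟩
    exact ⟨⟨h1, h2⟩, by simpa using h3⟩

theorem cells_pairwise (maps : List String) :
    (bCells maps (gH maps) (gW maps)).Pairwise lexLt := by
  rw [cells_eq_filter]
  exact List.Pairwise.sublist (List.filter_sublist) (Sc_pairwise maps)

theorem cells_nodup (maps : List String) : (bCells maps (gH maps) (gW maps)).Nodup :=
  List.Pairwise.imp (fun h => lexLt_ne h) (cells_pairwise maps)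

-- parent = {c: c for c in cells}
theorem get?_foldl_insert_self (l : List (Int × Int))
    (d : PySem.Dict (Int × Int) (Int × Int)) (x : Int × Int) :
    (l.foldl (fun d c => d.insert c c) d).get? x = if x ∈ l then some x else d.get? x := by
  induction l generalizing d with
  | nil => simp
  | cons c t ih =>
    rw [List.foldl_cons, ih]
    by_cases hx : x ∈ t
    · rw [if_pos hx, if_pos (List.mem_cons_of_mem _ hx)]
    · rw [if_neg hx, PySem.Dict.get?_insert]
      by_cases he : x = c
      · rw [if_pos he, if_pos (by rw [he]; exact List.mem_cons_self), he]
      · rw [if_neg he, if_neg (by simp [he, hx])]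

theorem get?_parent0 (l : List (Int × Int)) (x : Int × Int) :
    (bParent0 l).get? x = if x ∈ l then some x else none := by
  rw [bParent0, get?_foldl_insert_self]
  rfl

theorem keys_parent0 (l : List (Int × Int)) (hnd : l.Nodup) : (bParent0 l).keys = l := by
  rw [bParent0, PySem.Dict.keys_foldl_insert]
  have : (PySem.Dict.empty : PySem.Dict (Int × Int) (Int × Int)).keys = [] := rfl
  rw [this, PySem.Set.update_nil_left]
  exact PySem.Set.ofList_eq_self_of_nodup l hnd

-- the union-find invariant: keys are exactly the cells, parent pointers never lex-increase
def DInv (cs : List (Int × Int)) (P : PySem.Dict (Int × Int) (Int × Int)) : Prop :=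
  P.keys = cs ∧ ∀ x p, P.get? x = some p → (p = x ∨ lexLt p x) ∧ p ∈ cs

theorem DInv_size {cs : List (Int × Int)} {P : PySem.Dict (Int × Int) (Int × Int)}
    (h : DInv cs P) : P.size = cs.length := by
  have h2 : P.keys.length = cs.length := by rw [h.1]
  simpa [PySem.Dict.keys, PySem.Dict.size] using h2

theorem DInv_get?_mem {cs : List (Int × Int)} {P : PySem.Dict (Int × Int) (Int × Int)}
    (h : DInv cs P) {x : Int × Int} (hx : x ∈ cs) : ∃ p, P.get? x = some p := by
  cases hg : P.get? x with
  | some p => exact ⟨p, rfl⟩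
  | none =>
    exfalso
    have h2 := (PySem.Dict.get?_eq_none_iff_not_mem_keys P x).mp hg
    rw [h.1] at h2
    exact h2 hx

-- Boolean lex order (Python's tuple <)
def lexLtB (a b : Int × Int) : Bool := a.1 < b.1 || (a.1 == b.1 && a.2 < b.2)

theorem lexLtB_iff (a b : Int × Int) : lexLtB a b = true ↔ lexLt a b := by
  unfold lexLtB lexLt
  simp only [Bool.or_eq_true, Bool.and_eq_true, decide_eq_true_eq, beq_iff_eq]

-- scan rank: how many cells precede x
def rkOf (cs : List (Int × Int)) (x : Int × Int) : Nat :=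
  (cs.filter (fun y => lexLtB y x)).length

theorem countP_strict {α : Type} (l : List α) (p q : α → Bool)
    (himp : ∀ y ∈ l, p y = true → q y = true) (x : α) (hx : x ∈ l)
    (hq : q x = true) (hp : p x = false) : l.countP p < l.countP q := by
  induction l with
  | nil => simp at hx
  | cons a t ih =>
    rw [List.countP_cons, List.countP_cons]
    rcases List.mem_cons.mp hx with rfl | hxt
    · have hmono : t.countP p ≤ t.countP q :=
        List.countP_mono_left (fun y hy => himp y (List.mem_cons_of_mem _ hy))
      rw [hp, hq]
      simp only [Bool.false_eq_true, if_false, if_pos]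
      omega
    · have h2 := ih (fun y hy => himp y (List.mem_cons_of_mem _ hy)) hxt
      have h3 : (if p a = true then 1 else 0) ≤ (if q a = true then 1 else 0) := by
        by_cases hpa : p a = true
        · rw [if_pos hpa, if_pos (himp a List.mem_cons_self hpa)]
        · rw [if_neg hpa]
          omega
      omega

theorem rkOf_lt_of_lexLt {cs : List (Int × Int)} {p x : Int × Int} (hp : p ∈ cs)
    (hlt : lexLt p x) : rkOf cs p < rkOf cs x := by
  unfold rkOf
  rw [← List.countP_eq_length_filter, ← List.countP_eq_length_filter]
  refine countP_strict cs (fun y => lexLtB y p) (fun y => lexLtB y x) ?_ p hp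
    ((lexLtB_iff p x).mpr hlt) (by rw [← Bool.not_eq_true, lexLtB_iff]; exact lexLt_irrefl p)
  intro y _ hy
  rw [lexLtB_iff] at *
  exact lexLt_trans hy hlt

theorem rkOf_lt_length {cs : List (Int × Int)} {x : Int × Int} (hx : x ∈ cs) :
    rkOf cs x < cs.length := by
  unfold rkOf
  rw [← List.countP_eq_length_filter, ← List.countP_true (α := Int × Int)]
  exact countP_strict cs _ _ (fun y _ _ => rfl) x hx rfl
    (by rw [← Bool.not_eq_true, lexLtB_iff]; exact lexLt_irrefl x)


-- fuel-stability and root properties of find under the invariant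
theorem find_master {cs : List (Int × Int)} {P : PySem.Dict (Int × Int) (Int × Int)}
    (hinv : DInv cs P) :
    ∀ n x, x ∈ cs → rkOf cs x < n →
      (∀ m, rkOf cs x < m → bFind P m x = bFind P n x) ∧
      P.get? (bFind P n x) = some (bFind P n x) ∧ bFind P n x ∈ cs ∧
      (bFind P n x = x ∨ lexLt (bFind P n x) x) := by
  intro n
  induction n with
  | zero => intro x _ h; omega
  | succ n ih =>
    intro x hx hr
    obtain ⟨p, hp⟩ := DInv_get?_mem hinv hx
    obtain ⟨hdec, hpm⟩ := hinv.2 x p hp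
    by_cases hpx : p = x
    · subst hpx
      have hfix : ∀ m, rkOf cs p < m → bFind P m p = p := by
        intro m hm
        match m, hm with
        | m' + 1, _ => simp [bFind, hp]
      have hx1 : bFind P (n + 1) p = p := hfix (n + 1) hr
      rw [hx1]
      exact ⟨fun m hm => by rw [hfix m hm], hp, hx, Or.inl rfl⟩
    · have hlt : lexLt p x := hdec.resolve_left hpx
      have hrp : rkOf cs p < rkOf cs x := rkOf_lt_of_lexLt hpm hlt
      obtain ⟨hstab, hfix, hmem, hdec'⟩ := ih p hpm (by omega)
      have hunf : ∀ m, rkOf cs x < m → bFind P m x = bFind P n p := by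
        intro m hm
        match m, hm with
        | m' + 1, _ =>
          have h1 : bFind P (m' + 1) x = bFind P m' p := by simp [bFind, hp, hpx]
          rw [h1]
          exact hstab m' (by omega)
      have hn1 : bFind P (n + 1) x = bFind P n p := hunf (n + 1) hr
      rw [hn1]
      refine ⟨fun m hm => hunf m hm, hfix, hmem, ?_⟩
      rcases hdec' with h | h
      · exact Or.inr (by rw [h]; exact hlt)
      · exact Or.inr (lexLt_trans h hlt)

-- the root: find with fuel |cells| (what bFindFull computes under the invariant)
def rootD (cs : List (Int × Int)) (P : PySem.Dict (Int × Int) (Int × Int)) (x : Int × Int) :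
    Int × Int := bFind P cs.length x

theorem bFindFull_eq_rootD {cs : List (Int × Int)} {P : PySem.Dict (Int × Int) (Int × Int)}
    (hinv : DInv cs P) (x : Int × Int) : bFindFull P x = rootD cs P x := by
  rw [bFindFull, DInv_size hinv, rootD]

theorem rootD_spec {cs : List (Int × Int)} {P : PySem.Dict (Int × Int) (Int × Int)}
    (hinv : DInv cs P) {x : Int × Int} (hx : x ∈ cs) :
    P.get? (rootD cs P x) = some (rootD cs P x) ∧ rootD cs P x ∈ cs ∧
      (rootD cs P x = x ∨ lexLt (rootD cs P x) x) :=
  (find_master hinv cs.length x hx (rkOf_lt_length hx)).2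

theorem rootD_stab {cs : List (Int × Int)} {P : PySem.Dict (Int × Int) (Int × Int)}
    (hinv : DInv cs P) {x : Int × Int} (hx : x ∈ cs) {m : Nat} (hm : rkOf cs x < m) :
    bFind P m x = rootD cs P x :=
  (find_master hinv cs.length x hx (rkOf_lt_length hx)).1 m hm

theorem rootD_of_fix {cs : List (Int × Int)} {P : PySem.Dict (Int × Int) (Int × Int)}
    (hinv : DInv cs P) {x : Int × Int} (hx : x ∈ cs) (hfix : P.get? x = some x) :
    rootD cs P x = x := by
  have h := rootD_stab hinv hx (m := rkOf cs x + 1) (lt_add_one _)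
  rw [← h]
  simp [bFind, hfix]

theorem rootD_step {cs : List (Int × Int)} {P : PySem.Dict (Int × Int) (Int × Int)}
    (hinv : DInv cs P) {x p : Int × Int} (hx : x ∈ cs) (hp : P.get? x = some p)
    (hne : p ≠ x) : rootD cs P x = rootD cs P p := by
  have hpm : p ∈ cs := (hinv.2 x p hp).2
  have hlt : lexLt p x := ((hinv.2 x p hp).1).resolve_left hne
  have hrp := rkOf_lt_of_lexLt hpm hlt
  have h1 : bFind P (rkOf cs x + 1) x = bFind P (rkOf cs x) p := by simp [bFind, hp, hne]
  rw [← rootD_stab hinv hx (m := rkOf cs x + 1) (lt_add_one _), h1,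
    rootD_stab hinv hpm hrp]

theorem rootD_idem {cs : List (Int × Int)} {P : PySem.Dict (Int × Int) (Int × Int)}
    (hinv : DInv cs P) {x : Int × Int} (hx : x ∈ cs) :
    rootD cs P (rootD cs P x) = rootD cs P x :=
  rootD_of_fix hinv (rootD_spec hinv hx).2.1 (rootD_spec hinv hx).1

-- inserting a root link keeps the invariant
theorem DInv_insert {cs : List (Int × Int)} {P : PySem.Dict (Int × Int) (Int × Int)}
    {r1 r2 : Int × Int} (hinv : DInv cs P) (hm1 : r1 ∈ cs) (hm2 : r2 ∈ cs)
    (hlt : lexLt r1 r2) : DInv cs (P.insert r2 r1) := by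
  constructor
  · rw [PySem.Dict.keys_insert_of_contains _ _
      (by rw [PySem.Dict.contains_iff_mem_keys, hinv.1]; exact hm2)]
    exact hinv.1
  · intro x p hp
    rw [PySem.Dict.get?_insert] at hp
    by_cases hx : x = r2
    · rw [if_pos hx] at hp
      cases hp
      subst hx
      exact ⟨Or.inr hlt, hm1⟩
    · rw [if_neg hx] at hp
      exact hinv.2 x p hp

-- linking root r2 under root r1 redirects exactly the r2-class to r1
theorem rootD_merge {cs : List (Int × Int)} {P : PySem.Dict (Int × Int) (Int × Int)}
    {r1 r2 : Int × Int} (hinv : DInv cs P)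
    (h1 : P.get? r1 = some r1) (h2 : P.get? r2 = some r2) (hm1 : r1 ∈ cs) (hm2 : r2 ∈ cs)
    (hlt : lexLt r1 r2) :
    ∀ x ∈ cs, rootD cs (P.insert r2 r1) x =
      (if rootD cs P x = r2 then r1 else rootD cs P x) := by
  have hinv' := DInv_insert hinv hm1 hm2 hlt
  have hne12 : r1 ≠ r2 := lexLt_ne hlt
  have hfix1' : (P.insert r2 r1).get? r1 = some r1 := by
    rw [PySem.Dict.get?_insert, if_neg hne12]
    exact h1
  have hr1' : rootD cs (P.insert r2 r1) r1 = r1 := rootD_of_fix hinv' hm1 hfix1'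
  have hr2 : rootD cs P r2 = r2 := rootD_of_fix hinv hm2 h2
  suffices H : ∀ n x, x ∈ cs → rkOf cs x < n →
      rootD cs (P.insert r2 r1) x = (if rootD cs P x = r2 then r1 else rootD cs P x) by
    intro x hx
    exact H (rkOf cs x + 1) x hx (lt_add_one _)
  intro n
  induction n with
  | zero => intro x _ h; omega
  | succ n ih =>
    intro x hx hr
    by_cases hx2 : x = r2
    · have hstep : rootD cs (P.insert r2 r1) x = rootD cs (P.insert r2 r1) r1 := by
        refine rootD_step hinv' hx ?_ (by rw [hx2]; exact fun h => hne12 h)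
        rw [PySem.Dict.get?_insert, if_pos hx2]
      rw [hstep, hr1', hx2, hr2, if_pos rfl]
    · obtain ⟨p, hp⟩ := DInv_get?_mem hinv hx
      have hp' : (P.insert r2 r1).get? x = some p := by
        rw [PySem.Dict.get?_insert, if_neg hx2]
        exact hp
      by_cases hpx : p = x
      · subst hpx
        rw [rootD_of_fix hinv' hx hp', rootD_of_fix hinv hx hp, if_neg hx2]
      · have hpm : p ∈ cs := (hinv.2 x p hp).2
        have hltpx : lexLt p x := ((hinv.2 x p hp).1).resolve_left hpx
        have hrp := rkOf_lt_of_lexLt hpm hltpx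
        rw [rootD_step hinv' hx hp' hpx, rootD_step hinv hx hp hpx]
        exact ih p hpm (by omega)


-- ===== closure of the processed union edges =====

def eRel (E : List ((Int × Int) × (Int × Int))) (a b : Int × Int) : Prop :=
  (a, b) ∈ E ∨ (b, a) ∈ E

theorem rtg_congr {α : Type} {r r' : α → α → Prop} (h : ∀ a b, r a b ↔ r' a b) {x y : α} :
    Relation.ReflTransGen r x y ↔ Relation.ReflTransGen r' x y :=
  ⟨Relation.ReflTransGen.mono (fun a b hab => (h a b).mp hab),
   Relation.ReflTransGen.mono (fun a b hab => (h a b).mpr hab)⟩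

theorem rtg_empty_iff {α : Type} {r : α → α → Prop} (hr : ∀ a b, ¬ r a b) {x y : α} :
    Relation.ReflTransGen r x y ↔ x = y := by
  constructor
  · intro h
    induction h with
    | refl => rfl
    | tail _ hs _ => exact absurd hs (hr _ _)
  · rintro rfl
    exact Relation.ReflTransGen.refl

-- adding one (undirected) edge (a, b) to a relation: the new closure
theorem rtg_snoc {α : Type} (r : α → α → Prop) (a b : α) {x y : α} :
    Relation.ReflTransGen (fun u v => r u v ∨ (u = a ∧ v = b) ∨ (u = b ∧ v = a)) x y ↔
      Relation.ReflTransGen r x y ∨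
      (Relation.ReflTransGen r x a ∧ Relation.ReflTransGen r b y) ∨
      (Relation.ReflTransGen r x b ∧ Relation.ReflTransGen r a y) := by
  constructor
  · intro h
    induction h with
    | refl => exact Or.inl Relation.ReflTransGen.refl
    | @tail d e hxd hs ih =>
      rcases hs with hr | ⟨rfl, rfl⟩ | ⟨rfl, rfl⟩
      · rcases ih with h1 | ⟨h1, h2⟩ | ⟨h1, h2⟩
        · exact Or.inl (h1.tail hr)
        · exact Or.inr (Or.inl ⟨h1, h2.tail hr⟩)
        · exact Or.inr (Or.inr ⟨h1, h2.tail hr⟩)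
      · rcases ih with h1 | ⟨h1, h2⟩ | ⟨h1, h2⟩
        · exact Or.inr (Or.inl ⟨h1, Relation.ReflTransGen.refl⟩)
        · exact Or.inr (Or.inl ⟨h1, Relation.ReflTransGen.refl⟩)
        · exact Or.inl h1
      · rcases ih with h1 | ⟨h1, h2⟩ | ⟨h1, h2⟩
        · exact Or.inr (Or.inr ⟨h1, Relation.ReflTransGen.refl⟩)
        · exact Or.inl h1
        · exact Or.inr (Or.inr ⟨h1, Relation.ReflTransGen.refl⟩)
  · have hmono : ∀ {u v : α}, Relation.ReflTransGen r u v →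
        Relation.ReflTransGen (fun u v => r u v ∨ (u = a ∧ v = b) ∨ (u = b ∧ v = a)) u v :=
      fun h => Relation.ReflTransGen.mono (fun _ _ hr => Or.inl hr) h
    have hab : Relation.ReflTransGen
        (fun u v => r u v ∨ (u = a ∧ v = b) ∨ (u = b ∧ v = a)) a b :=
      Relation.ReflTransGen.single (Or.inr (Or.inl ⟨rfl, rfl⟩))
    have hba : Relation.ReflTransGen
        (fun u v => r u v ∨ (u = a ∧ v = b) ∨ (u = b ∧ v = a)) b a :=
      Relation.ReflTransGen.single (Or.inr (Or.inr ⟨rfl, rfl⟩))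
    rintro (h | ⟨h1, h2⟩ | ⟨h1, h2⟩)
    · exact hmono h
    · exact ((hmono h1).trans hab).trans (hmono h2)
    · exact ((hmono h1).trans hba).trans (hmono h2)

theorem eRel_append_singleton (E : List ((Int × Int) × (Int × Int))) (c n a b : Int × Int) :
    eRel (E ++ [(c, n)]) a b ↔ eRel E a b ∨ (a = c ∧ b = n) ∨ (a = n ∧ b = c) := by
  unfold eRel
  simp only [List.mem_append, List.mem_singleton, Prod.mk.injEq]
  tauto

-- closure over the appended edge, in closed form
theorem rtg_eRel_append (E : List ((Int × Int) × (Int × Int))) (c n : Int × Int)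
    {x y : Int × Int} :
    Relation.ReflTransGen (eRel (E ++ [(c, n)])) x y ↔
      Relation.ReflTransGen (eRel E) x y ∨
      (Relation.ReflTransGen (eRel E) x c ∧ Relation.ReflTransGen (eRel E) n y) ∨
      (Relation.ReflTransGen (eRel E) x n ∧ Relation.ReflTransGen (eRel E) c y) := by
  rw [rtg_congr (fun a b => eRel_append_singleton E c n a b)]
  exact rtg_snoc (eRel E) c n

theorem pairLt_iff (a b : Int × Int) : pairLt a b = true ↔ lexLt a b := by
  unfold pairLt lexLt
  simp only [Bool.or_eq_true, Bool.and_eq_true, decide_eq_true_eq, beq_iff_eq]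

theorem pair_min_max {a b : Int × Int} (h : lexLt a b) :
    pairMin a b = a ∧ pairMax a b = b := by
  have hb : pairLt a b = true := (pairLt_iff a b).mpr h
  have hnb : pairLt b a = false := by
    rw [← Bool.not_eq_true, pairLt_iff]
    exact lexLt_asymm h
  constructor
  · unfold pairMin; rw [hnb]; simp
  · unfold pairMax; rw [hb]; simp

theorem pair_min_max' {a b : Int × Int} (h : lexLt b a) :
    pairMin a b = b ∧ pairMax a b = a := by
  have hb : pairLt b a = true := (pairLt_iff b a).mpr h
  have hnb : pairLt a b = false := by
    rw [← Bool.not_eq_true, pairLt_iff]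
    exact lexLt_asymm h
  constructor
  · unfold pairMin; rw [hb]; simp
  · unfold pairMax; rw [hnb]; simp

-- how the collapse u ↦ (if u = r2 then r1 else u) identifies values
theorem collapse_eq_iff {u v r1 r2 : Int × Int} (hne : r1 ≠ r2) :
    ((if u = r2 then r1 else u) = (if v = r2 then r1 else v)) ↔
      (u = v ∨ (u = r2 ∧ v = r1) ∨ (u = r1 ∧ v = r2)) := by
  by_cases h1 : u = r2 <;> by_cases h2 : v = r2
  · subst h1; subst h2; simp
  · rw [if_pos h1, if_neg h2]
    subst h1
    constructor
    · rintro rfl; exact Or.inr (Or.inl ⟨rfl, rfl⟩)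
    · rintro (rfl | ⟨-, rfl⟩ | ⟨h3, -⟩)
      · exact absurd rfl h2
      · rfl
      · exact absurd h3.symm hne
  · rw [if_neg h1, if_pos h2]
    subst h2
    constructor
    · rintro rfl; exact Or.inr (Or.inr ⟨rfl, rfl⟩)
    · rintro (rfl | ⟨h3, -⟩ | ⟨rfl, -⟩)
      · exact absurd rfl h1
      · exact absurd h3 h1
      · rfl
  · rw [if_neg h1, if_neg h2]
    constructor
    · rintro rfl; exact Or.inl rfl
    · rintro (rfl | ⟨h3, -⟩ | ⟨-, h4⟩)
      · rfl
      · exact absurd h3 h1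
      · exact absurd h4 h2

-- the union-pass invariant: root equality is exactly the closure of the processed edges
def Phi (cs : List (Int × Int)) (E : List ((Int × Int) × (Int × Int)))
    (P : PySem.Dict (Int × Int) (Int × Int)) : Prop :=
  DInv cs P ∧ ∀ x ∈ cs, ∀ y ∈ cs,
    (rootD cs P x = rootD cs P y ↔ Relation.ReflTransGen (eRel E) x y)

-- processing one candidate neighbour n of c preserves the invariant
theorem Phi_unite (cs : List (Int × Int))
    (E : List ((Int × Int) × (Int × Int))) (P : PySem.Dict (Int × Int) (Int × Int))
    (hphi : Phi cs E P) (c n : Int × Int) (hc : c ∈ cs) :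
    Phi cs (if n ∈ cs then E ++ [(c, n)] else E) (bUnite P c n) := by
  obtain ⟨hinv, hiff⟩ := hphi
  by_cases hn : n ∈ cs
  · rw [if_pos hn]
    unfold bUnite
    rw [if_pos (by rw [PySem.Dict.contains_iff_mem_keys, hinv.1]; exact hn)]
    simp only [bFindFull_eq_rootD hinv]
    have hraS := rootD_spec hinv hc
    have hrbS := rootD_spec hinv hn
    by_cases hne : rootD cs P c = rootD cs P n
    · rw [if_neg (by simpa using hne)]
      refine ⟨hinv, ?_⟩
      intro x hx y hy
      rw [rtg_eRel_append, ← hiff x hx y hy, ← hiff x hx c hc, ← hiff n hn y hy,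
        ← hiff x hx n hn, ← hiff c hc y hy]
      constructor
      · intro h
        exact Or.inl h
      · rintro (h | ⟨h1, h2⟩ | ⟨h1, h2⟩)
        · exact h
        · exact h1.trans (hne.trans h2)
        · exact h1.trans (hne.symm.trans h2)
    · rw [if_pos (by simpa using hne)]
      rcases lexLt_total hne with hlt | hlt
      · -- root c is the smaller root: r1 = root c, r2 = root n
        obtain ⟨hminE, hmaxE⟩ := pair_min_max hlt
        rw [hminE, hmaxE]
        have hmg := rootD_merge hinv hraS.1 hrbS.1 hraS.2.1 hrbS.2.1 hlt
        refine ⟨DInv_insert hinv hraS.2.1 hrbS.2.1 hlt, ?_⟩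
        intro x hx y hy
        rw [hmg x hx, hmg y hy, rtg_eRel_append,
          collapse_eq_iff (lexLt_ne hlt), ← hiff x hx y hy, ← hiff x hx c hc,
          ← hiff n hn y hy, ← hiff x hx n hn, ← hiff c hc y hy]
        constructor
        · rintro (h | ⟨h1, h2⟩ | ⟨h1, h2⟩)
          · exact Or.inl h
          · exact Or.inr (Or.inr ⟨h1, h2.symm⟩)
          · exact Or.inr (Or.inl ⟨h1, h2.symm⟩)
        · rintro (h | ⟨h1, h2⟩ | ⟨h1, h2⟩)
          · exact Or.inl h
          · exact Or.inr (Or.inr ⟨h1, h2.symm⟩)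
          · exact Or.inr (Or.inl ⟨h1, h2.symm⟩)
      · -- root n is the smaller root: r1 = root n, r2 = root c
        obtain ⟨hminE, hmaxE⟩ := pair_min_max' hlt
        rw [hminE, hmaxE]
        have hmg := rootD_merge hinv hrbS.1 hraS.1 hrbS.2.1 hraS.2.1 hlt
        refine ⟨DInv_insert hinv hrbS.2.1 hraS.2.1 hlt, ?_⟩
        intro x hx y hy
        rw [hmg x hx, hmg y hy, rtg_eRel_append,
          collapse_eq_iff (lexLt_ne hlt), ← hiff x hx y hy, ← hiff x hx c hc,
          ← hiff n hn y hy, ← hiff x hx n hn, ← hiff c hc y hy]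
        constructor
        · rintro (h | ⟨h1, h2⟩ | ⟨h1, h2⟩)
          · exact Or.inl h
          · exact Or.inr (Or.inl ⟨h1, h2.symm⟩)
          · exact Or.inr (Or.inr ⟨h1, h2.symm⟩)
        · rintro (h | ⟨h1, h2⟩ | ⟨h1, h2⟩)
          · exact Or.inl h
          · exact Or.inr (Or.inl ⟨h1, h2.symm⟩)
          · exact Or.inr (Or.inr ⟨h1, h2.symm⟩)
  · rw [if_neg hn]
    unfold bUnite
    rw [if_neg (by rw [PySem.Dict.contains_iff_mem_keys, hinv.1]; exact hn)]
    exact ⟨hinv, hiff⟩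


-- ghost edge list for a processed prefix Q of the cells
def edgesOf (cs : List (Int × Int)) (Q : List (Int × Int)) :
    List ((Int × Int) × (Int × Int)) :=
  Q.flatMap (fun c =>
    (if (c.1, c.2 + 1) ∈ cs then [(c, (c.1, c.2 + 1))] else []) ++
    (if (c.1 + 1, c.2) ∈ cs then [(c, (c.1 + 1, c.2))] else []))

theorem Phi_cellstep (cs : List (Int × Int)) (E : List ((Int × Int) × (Int × Int)))
    (P : PySem.Dict (Int × Int) (Int × Int)) (hphi : Phi cs E P) (c : Int × Int)
    (hc : c ∈ cs) :
    Phi cs (E ++ ((if (c.1, c.2 + 1) ∈ cs then [(c, (c.1, c.2 + 1))] else []) ++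
        (if (c.1 + 1, c.2) ∈ cs then [(c, (c.1 + 1, c.2))] else [])))
      ([(c.1, c.2 + 1), (c.1 + 1, c.2)].foldl (fun P n => bUnite P c n) P) := by
  have h1 := Phi_unite cs E P hphi c (c.1, c.2 + 1) hc
  have h2 := Phi_unite cs _ _ h1 c (c.1 + 1, c.2) hc
  simp only [List.foldl_cons, List.foldl_nil]
  by_cases hr : (c.1, c.2 + 1) ∈ cs <;> by_cases hd : (c.1 + 1, c.2) ∈ cs <;>
    simp only [hr, hd, if_pos, if_neg, not_false_iff] at h2 ⊢ <;>
      simpa [List.append_assoc] using h2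

theorem Phi_build_fold (cs : List (Int × Int)) :
    ∀ (l : List (Int × Int)) (E : List ((Int × Int) × (Int × Int)))
      (P : PySem.Dict (Int × Int) (Int × Int)),
    (∀ c ∈ l, c ∈ cs) → Phi cs E P →
    Phi cs (E ++ edgesOf cs l)
      (l.foldl (fun P c => [(c.1, c.2 + 1), (c.1 + 1, c.2)].foldl (fun P n => bUnite P c n) P) P) := by
  intro l
  induction l with
  | nil => intro E P _ h; simpa [edgesOf] using h
  | cons c t ih =>
    intro E P hl hphi
    rw [List.foldl_cons]
    have h1 := Phi_cellstep cs E P hphi c (hl c List.mem_cons_self)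
    have h2 := ih _ _ (fun x hx => hl x (List.mem_cons_of_mem _ hx)) h1
    simpa [edgesOf, List.flatMap_cons, List.append_assoc] using h2

theorem Phi_init (cs : List (Int × Int)) (hnd : cs.Nodup) : Phi cs [] (bParent0 cs) := by
  have hinv : DInv cs (bParent0 cs) := by
    constructor
    · exact keys_parent0 cs hnd
    · intro x p hp
      rw [get?_parent0] at hp
      by_cases hx : x ∈ cs
      · rw [if_pos hx] at hp
        cases hp
        exact ⟨Or.inl rfl, hx⟩
      · rw [if_neg hx] at hp
        cases hp
  refine ⟨hinv, ?_⟩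
  intro x hx y hy
  have hrx : rootD cs (bParent0 cs) x = x :=
    rootD_of_fix hinv hx (by rw [get?_parent0, if_pos hx])
  have hry : rootD cs (bParent0 cs) y = y :=
    rootD_of_fix hinv hy (by rw [get?_parent0, if_pos hy])
  rw [hrx, hry, rtg_empty_iff (fun a b h => by simp [eRel] at h)]

theorem Phi_final (cs : List (Int × Int)) (hnd : cs.Nodup) :
    Phi cs (edgesOf cs cs) (bBuild cs) := by
  have h := Phi_build_fold cs cs [] (bParent0 cs) (fun c hc => hc) (Phi_init cs hnd)
  simpa [bBuild] using h

theorem mem_ite_singleton {α : Type} {P : Prop} [Decidable P] {x y : α} :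
    (y ∈ if P then [x] else ([] : List α)) ↔ P ∧ y = x := by
  split <;> simp_all

theorem mem_edgesOf (cs Q : List (Int × Int)) (a b : Int × Int) :
    ((a, b) ∈ edgesOf cs Q) ↔
      a ∈ Q ∧ b ∈ cs ∧ (b = (a.1, a.2 + 1) ∨ b = (a.1 + 1, a.2)) := by
  unfold edgesOf
  rw [List.mem_flatMap]
  constructor
  · rintro ⟨c, hcQ, hm⟩
    rcases List.mem_append.mp hm with h | h <;> rw [mem_ite_singleton] at h
    · obtain ⟨hmem, heq⟩ := h
      have h1 : a = c := congrArg Prod.fst heq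
      have h2 : b = (c.1, c.2 + 1) := congrArg Prod.snd heq
      subst h1
      exact ⟨hcQ, h2 ▸ hmem, Or.inl h2⟩
    · obtain ⟨hmem, heq⟩ := h
      have h1 : a = c := congrArg Prod.fst heq
      have h2 : b = (c.1 + 1, c.2) := congrArg Prod.snd heq
      subst h1
      exact ⟨hcQ, h2 ▸ hmem, Or.inr h2⟩
  · rintro ⟨haQ, hbc, rfl | rfl⟩
    · exact ⟨a, haQ, List.mem_append.mpr (Or.inl (mem_ite_singleton.mpr ⟨hbc, rfl⟩))⟩
    · exact ⟨a, haQ, List.mem_append.mpr (Or.inr (mem_ite_singleton.mpr ⟨hbc, rfl⟩))⟩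

-- the complete edge set generates exactly the 4-neighbour relation on non-'X' cells
theorem eRel_full_iff (maps : List String) (a b : Int × Int) :
    eRel (edgesOf (bCells maps (gH maps) (gW maps)) (bCells maps (gH maps) (gW maps))) a b
      ↔ StepR maps a b := by
  unfold eRel StepR
  simp only [mem_edgesOf, mem_cells]
  obtain ⟨a1, a2⟩ := a
  obtain ⟨b1, b2⟩ := b
  simp only [nbrs, List.mem_cons, List.not_mem_nil, or_false, Prod.mk.injEq]
  constructor
  · rintro (⟨ha, hb, h | h⟩ | ⟨hb, ha, h | h⟩) <;> obtain ⟨h1, h2⟩ := h <;>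
      exact ⟨by omega, ha, hb⟩
  · rintro ⟨hmem, ha, hb⟩
    rcases hmem with ⟨h1, h2⟩ | ⟨h1, h2⟩ | ⟨h1, h2⟩ | ⟨h1, h2⟩
    · exact Or.inr ⟨hb, ha, Or.inr ⟨by omega, by omega⟩⟩
    · exact Or.inl ⟨ha, hb, Or.inr ⟨by omega, by omega⟩⟩
    · exact Or.inl ⟨ha, hb, Or.inl ⟨by omega, by omega⟩⟩
    · exact Or.inr ⟨hb, ha, Or.inl ⟨by omega, by omega⟩⟩

-- the built union-find decides region connectivity
theorem rootD_conn (maps : List String) :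
    DInv (bCells maps (gH maps) (gW maps)) (bBuild (bCells maps (gH maps) (gW maps))) ∧
    ∀ x ∈ bCells maps (gH maps) (gW maps), ∀ y ∈ bCells maps (gH maps) (gW maps),
      (rootD (bCells maps (gH maps) (gW maps)) (bBuild (bCells maps (gH maps) (gW maps))) x =
        rootD (bCells maps (gH maps) (gW maps)) (bBuild (bCells maps (gH maps) (gW maps))) y
       ↔ Conn maps x y) := by
  obtain ⟨hinv, hiff⟩ := Phi_final (bCells maps (gH maps) (gW maps)) (cells_nodup maps)
  refine ⟨hinv, ?_⟩
  intro x hx y hy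
  rw [hiff x hx y hy]
  exact rtg_congr (fun a b => eRel_full_iff maps a b)


-- the root function of the built union-find
def rootF (maps : List String) (c : Int × Int) : Int × Int :=
  rootD (bCells maps (gH maps) (gW maps)) (bBuild (bCells maps (gH maps) (gW maps))) c

-- scan-first region cells are exactly the fixpoints of the root function
theorem isMin_iff_fix (maps : List String) (c : Int × Int)
    (hc : c ∈ bCells maps (gH maps) (gW maps)) :
    isMin maps c ↔ rootF maps c = c := by
  unfold rootF
  obtain ⟨hinv, hconn⟩ := rootD_conn maps
  have hspec := rootD_spec hinv hc
  constructor
  · intro hmin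
    have hfm := hspec.2.1
    have hok : Ok maps _ := (mem_cells maps _).mp hfm
    have hcn : Conn maps (rootD (bCells maps (gH maps) (gW maps))
        (bBuild (bCells maps (gH maps) (gW maps))) c) c := by
      rw [← hconn _ hfm _ hc]
      exact rootD_idem hinv hc
    rcases hspec.2.2 with h | h
    · exact h
    · exact absurd h (hmin.2 _ hok hcn)
  · intro hfix
    refine ⟨(mem_cells maps c).mp hc, ?_⟩
    intro p hpok hpc hlt
    have hpm : p ∈ bCells maps (gH maps) (gW maps) := (mem_cells maps p).mpr hpok
    have hroots := (hconn p hpm c hc).mpr hpc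
    have hps := rootD_spec hinv hpm
    rcases hps.2.2 with h | h
    · exact lexLt_irrefl c (((h ▸ hroots).trans hfix) ▸ hlt)
    · exact lexLt_asymm hlt ((hroots.trans hfix) ▸ h)

-- the grouping pass: keys are the region representatives in scan order,
-- each holding its region's running sum
theorem sums_fold (maps : List String) (cs : List (Int × Int)) (f : (Int × Int) → (Int × Int))
    (hpw : cs.Pairwise lexLt)
    (hmemf : ∀ c ∈ cs, f c ∈ cs) (hdecf : ∀ c ∈ cs, f c = c ∨ lexLt (f c) c)
    (hidem : ∀ c ∈ cs, f (f c) = f c) :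
    ∀ (rest Q : List (Int × Int)) (d : PySem.Dict (Int × Int) Int),
    cs = Q ++ rest →
    d.keys = Q.filter (fun c => f c == c) →
    (∀ r, d.getD r 0 = ((Q.filter (fun q => f q == r)).map (bVal maps)).sum) →
    (rest.foldl (fun d c => d.insert (f c) (d.getD (f c) 0 + bVal maps c)) d).keys
      = cs.filter (fun c => f c == c) ∧
    (∀ r, (rest.foldl (fun d c => d.insert (f c) (d.getD (f c) 0 + bVal maps c)) d).getD r 0
      = ((cs.filter (fun q => f q == r)).map (bVal maps)).sum) := by
  intro rest
  induction rest with
  | nil =>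
    intro Q d hsplit hkeys hvals
    rw [List.append_nil] at hsplit
    subst hsplit
    exact ⟨hkeys, hvals⟩
  | cons c rest' ih =>
    intro Q d hsplit hkeys hvals
    have hcQ : ∀ p, p ∈ Q ↔ (p ∈ cs ∧ lexLt p c) := prefix_char hpw hsplit
    have hccs : c ∈ cs := by rw [hsplit]; exact List.mem_append.mpr (Or.inr List.mem_cons_self)
    rw [List.foldl_cons]
    have hsplit' : cs = (Q ++ [c]) ++ rest' := by rw [hsplit]; simp
    have hkeys' : (d.insert (f c) (d.getD (f c) 0 + bVal maps c)).keys
        = (Q ++ [c]).filter (fun x => f x == x) := by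
      by_cases hfc : f c = c
      · have hnotin : c ∉ Q := fun h => lexLt_irrefl c ((hcQ c).mp h).2
        have hcont : d.contains (f c) = false := by
          rw [← Bool.not_eq_true, PySem.Dict.contains_iff_mem_keys, hkeys, hfc]
          intro hmem
          exact hnotin (List.mem_of_mem_filter hmem)
        rw [PySem.Dict.keys_insert_of_not_contains _ _ hcont, hkeys, List.filter_append, hfc]
        congr 1
        have hb : (f c == c) = true := by simpa using hfc
        rw [List.filter_singleton, hb]
        rfl
      · have hlt : lexLt (f c) c := (hdecf c hccs).resolve_left hfc
        have hfQ : f c ∈ Q := (hcQ (f c)).mpr ⟨hmemf c hccs, hlt⟩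
        have hcont : d.contains (f c) = true := by
          rw [PySem.Dict.contains_iff_mem_keys, hkeys, List.mem_filter]
          exact ⟨hfQ, by simpa using hidem c hccs⟩
        rw [PySem.Dict.keys_insert_of_contains _ _ hcont, hkeys, List.filter_append]
        have hone : ([c].filter (fun x => f x == x)) = [] := by
          have hb : (f c == c) = false := by simpa using hfc
          rw [List.filter_singleton, hb]
          rfl
        rw [hone, List.append_nil]
    have hvals' : ∀ r, (d.insert (f c) (d.getD (f c) 0 + bVal maps c)).getD r 0
        = (((Q ++ [c]).filter (fun q => f q == r)).map (bVal maps)).sum := by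
      intro r
      rw [PySem.Dict.getD_insert, List.filter_append, List.map_append, List.sum_append,
        List.filter_singleton]
      by_cases hr : r = f c
      · have hb : (f c == r) = true := by simpa using hr.symm
        rw [if_pos hr, hb, hvals, hr]
        simp
      · have hb : (f c == r) = false := by simpa using fun h => hr h.symm
        rw [if_neg hr, hb, hvals]
        simp
    exact ih (Q ++ [c]) _ hsplit' hkeys' hvals'

-- pointwise: the stored sum at a representative is its region sum
theorem classSum_eq_compSum (maps : List String) (r : Int × Int)
    (hr : r ∈ bCells maps (gH maps) (gW maps)) (hfix : rootF maps r = r) :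
    (((bCells maps (gH maps) (gW maps)).filter
        (fun q => rootF maps q == r)).map (bVal maps)).sum = compSum maps r := by
  obtain ⟨hinv, hconn⟩ := rootD_conn maps
  have hnd : ((bCells maps (gH maps) (gW maps)).filter
      (fun q => rootF maps q == r)).Nodup := (cells_nodup maps).filter _
  have hfix' : rootD (bCells maps (gH maps) (gW maps))
      (bBuild (bCells maps (gH maps) (gW maps))) r = r := hfix
  have hmem : ∀ e, e ∈ (bCells maps (gH maps) (gW maps)).filter
      (fun q => rootF maps q == r) ↔ e ∈ compF maps r := by
    intro e
    rw [List.mem_filter, mem_compF, beq_iff_eq]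
    unfold rootF
    constructor
    · rintro ⟨hecs, hfe⟩
      have hcn : Conn maps e r := by
        rw [← hconn e hecs r hr, hfe, hfix']
      exact ⟨mem_allF_of_ok ((mem_cells maps e).mp hecs), Conn_symm hcn⟩
    · rintro ⟨heF, hcn⟩
      have hok : Ok maps e := Ok_of_Conn hcn ((mem_cells maps r).mp hr)
      have hecs : e ∈ bCells maps (gH maps) (gW maps) := (mem_cells maps e).mpr hok
      exact ⟨hecs, ((hconn e hecs r hr).mpr (Conn_symm hcn)).trans hfix'⟩
  have htf : ((bCells maps (gH maps) (gW maps)).filter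
      (fun q => rootF maps q == r)).toFinset = compF maps r := by
    ext e
    rw [List.mem_toFinset]
    exact hmem e
  have hsum := List.sum_toFinset (cellVal maps) hnd
  rw [htf] at hsum
  unfold compSum
  rw [hsum]
  exact congrArg List.sum (List.map_congr_left (fun e _ => bVal_eq maps e)).symm |>.symm

-- the list of representatives, in scan order, is the list of scan-first cells
theorem keys_eq_minList (maps : List String) :
    (bCells maps (gH maps) (gW maps)).filter (fun c => rootF maps c == c)
      = (Sc maps).filter (isMinB maps) := by
  rw [cells_eq_filter, List.filter_filter]
  apply List.filter_congr
  intro c hcSc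
  by_cases hok : Ok maps c
  · have hccs : c ∈ bCells maps (gH maps) (gW maps) := (mem_cells maps c).mpr hok
    have hch : (!(bCharAt maps c == 'X')) = true := by
      rw [bCharAt_eq]
      simpa using hok.2.2
    by_cases hfix : rootF maps c = c
    · have hfb : (rootF maps c == c) = true := by simpa using hfix
      have hminB : isMinB maps c = true :=
        @decide_eq_true _ (Classical.propDecidable _) ((isMin_iff_fix maps c hccs).mpr hfix)
      rw [hfb, hch, hminB]
      rfl
    · have hfb : (rootF maps c == c) = false := by simpa using hfix
      have hminB : isMinB maps c = false :=
        @decide_eq_false _ (Classical.propDecidable _)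
          (fun h => hfix ((isMin_iff_fix maps c hccs).mp h))
      rw [hfb, hch, hminB]
      rfl
  · have hch : (!(bCharAt maps c == 'X')) = false := by
      rw [bCharAt_eq]
      have hbd := (mem_Sc maps c).mp hcSc
      by_contra h
      exact hok ⟨hbd.1, hbd.2, by
        intro hx
        rw [hx] at h
        simp at h⟩
    have hminB : isMinB maps c = false :=
      @decide_eq_false _ (Classical.propDecidable _) (fun h => hok h.1)
    rw [hch, hminB]
    simp


-- B computes the canonical list, then sorts (or returns [-1])
theorem alt_eq_canon (maps : List String) (hne : maps ≠ []) :
    solution_alt maps =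
      (if canonL maps = [] then [-1]
       else PySem.List.sorted (canonL maps) (fun x => x) false) := by
  obtain ⟨m0, mrest, rfl⟩ := List.exists_cons_of_ne_nil hne
  have hW : PySem.Str.len ((PySem.List.pyGet? (m0 :: mrest) 0).getD "") = gW (m0 :: mrest) := by
    rw [PySem.List.pyGet?_zero_cons, Option.getD_some, PySem.Str.len_eq]
    rfl
  have hH : ((m0 :: mrest).length : Int) = gH (m0 :: mrest) := rfl
  simp only [solution_alt]
  rw [hW, hH]
  obtain ⟨hinv, hconn⟩ := rootD_conn (m0 :: mrest)
  have hbs : bSums (m0 :: mrest) (bCells (m0 :: mrest) (gH (m0 :: mrest)) (gW (m0 :: mrest)))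
      (bBuild (bCells (m0 :: mrest) (gH (m0 :: mrest)) (gW (m0 :: mrest))))
      = (bCells (m0 :: mrest) (gH (m0 :: mrest)) (gW (m0 :: mrest))).foldl
          (fun d c => d.insert (rootF (m0 :: mrest) c)
            (d.getD (rootF (m0 :: mrest) c) 0 + bVal (m0 :: mrest) c)) PySem.Dict.empty := by
    unfold bSums
    congr 1
    funext d c
    rw [bFindFull_eq_rootD hinv]
    rfl
  obtain ⟨hk, hv⟩ := sums_fold (m0 :: mrest)
    (bCells (m0 :: mrest) (gH (m0 :: mrest)) (gW (m0 :: mrest))) (rootF (m0 :: mrest))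
    (cells_pairwise (m0 :: mrest))
    (fun c hc => (rootD_spec hinv hc).2.1)
    (fun c hc => (rootD_spec hinv hc).2.2)
    (fun c hc => rootD_idem hinv hc)
    (bCells (m0 :: mrest) (gH (m0 :: mrest)) (gW (m0 :: mrest))) [] PySem.Dict.empty
    (by simp) rfl (by intro r; simp [PySem.Dict.getD_empty])
  have hnd : ((bCells (m0 :: mrest) (gH (m0 :: mrest)) (gW (m0 :: mrest))).foldl
      (fun d c => d.insert (rootF (m0 :: mrest) c)
        (d.getD (rootF (m0 :: mrest) c) 0 + bVal (m0 :: mrest) c))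
      PySem.Dict.empty).keys.Nodup := by
    rw [hk]
    exact (cells_nodup (m0 :: mrest)).filter _
  have hvalues : (bSums (m0 :: mrest)
      (bCells (m0 :: mrest) (gH (m0 :: mrest)) (gW (m0 :: mrest)))
      (bBuild (bCells (m0 :: mrest) (gH (m0 :: mrest)) (gW (m0 :: mrest))))).values
      = ((Sc (m0 :: mrest)).filter (isMinB (m0 :: mrest))).map
          (fun c => compSum (m0 :: mrest) c) := by
    rw [hbs, PySem.Dict.values_eq_map_keys _ hnd 0, hk, keys_eq_minList (m0 :: mrest)]
    apply List.map_congr_left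
    intro k hkmem
    rw [hv k]
    have hkS := List.mem_filter.mp hkmem
    have hmin : isMin (m0 :: mrest) k :=
      @of_decide_eq_true _ (Classical.propDecidable _) hkS.2
    have hkc : k ∈ bCells (m0 :: mrest) (gH (m0 :: mrest)) (gW (m0 :: mrest)) :=
      (mem_cells (m0 :: mrest) k).mpr hmin.1
    exact classSum_eq_compSum (m0 :: mrest) k hkc ((isMin_iff_fix (m0 :: mrest) k hkc).mp hmin)
  rw [hvalues]
  simp only [canonL]

-- ===== VERDICT (by name: the statement is the Claim_ definition above) =====
theorem solution_spec : Claim_equal_solution := by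
  intro maps _ hpre
  unfold Spec_solution
  rw [solution_eq_canon maps hpre.1, alt_eq_canon maps hpre.1]
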